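-- pv_equiv track=rewrite | github.com/Sosohy/algorithm_study | 프로그래머스/unrated/250136. ［PCCP 기출문제］ 2번 ／ 석유 시추/［PCCP 기출문제］ 2번 ／ 석유 시추.py | solution
-- ===== SOURCE A (Python) =====
-- from collections import deque
--
-- def solution(land):
--     answer = 0
--     dic = {}
--     landDic = {}
--     cnt = 2
--
--     def bfs(n, m):
--         queue = deque()
--         pos = [(0, -1), (-1, 0), (1, 0), (0, 1)]
--         oil = 1
--
--         if m not in landDic:
--             landDic[m] = set()
--         landDic[m].add(cnt)
--         land[n][m] = cnt
--         queue.append((n, m))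
--
--         while(queue):
--             x, y = queue.popleft()
--
--             for k in range(4):
--                 nx = x+pos[k][0]
--                 ny = y+pos[k][1]
--
--                 if 0<=nx<len(land) and 0<=ny<len(land[0]) and land[nx][ny] == 1:
--                     if ny not in landDic:
--                         landDic[ny] = set()
--                     landDic[ny].add(cnt)
--                     land[nx][ny] = cnt
--                     queue.append((nx, ny))
--                     oil += 1
--         return oil
--
--     for i in range(len(land[0])):
--         for j in range(len(land)):
--             if(land[j][i] == 1):
--                 dic[cnt] = bfs(j, i)
--                 cnt += 1
--
--     for v in landDic.values():
--         tmp = 0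
--         for i in v:
--             tmp += dic[i]
--
--         answer = max(answer, tmp)
--
--     return answer
-- ===== SOURCE B (Python) =====
-- def solution(land):
--     rows = len(land)
--     cols = len(land[0]) if land else 0
--
--     oil = [(j, i) for j in range(rows) for i in range(cols) if land[j][i] == 1]
--     oil_set = set(oil)
--
--     def component(c):
--         comp = [c]
--         member = {c}
--         for _ in range(len(oil) + 1):
--             grown = False
--             for x, y in list(comp):
--                 for dx, dy in ((0, 1), (0, -1), (1, 0), (-1, 0)):
--                     n = (x + dx, y + dy)
--                     if n in oil_set and n not in member:
--                         member.add(n)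
--                         comp.append(n)
--                         grown = True
--             if not grown:
--                 break
--         return comp
--
--     comps = []
--     seen = set()
--     for c in oil:
--         if c not in seen:
--             k = component(c)
--             comps.append(k)
--             seen.update(k)
--
--     best = 0
--     for i in range(cols):
--         total = sum(len(k) for k in comps if any(y == i for _, y in k))
--         best = max(best, total)
--     return best
-- ===== Notes on version B (the rewrite author's own statement) =====
-- stated objective: alternative
-- what changed: Replaces the in-place BFS grid relabeling with a queue and a column->label-set dict by per-component saturation (repeatedly growing a cell list by oil neighbours until a pass adds nothing) over an immutable oil-cell list, then aggregating per column directly from the explicit component cell lists; B does not mutate its argument.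
-- outside the precondition, e.g. on solution([]): A raises IndexError, B returns 0
import Mathlib
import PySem

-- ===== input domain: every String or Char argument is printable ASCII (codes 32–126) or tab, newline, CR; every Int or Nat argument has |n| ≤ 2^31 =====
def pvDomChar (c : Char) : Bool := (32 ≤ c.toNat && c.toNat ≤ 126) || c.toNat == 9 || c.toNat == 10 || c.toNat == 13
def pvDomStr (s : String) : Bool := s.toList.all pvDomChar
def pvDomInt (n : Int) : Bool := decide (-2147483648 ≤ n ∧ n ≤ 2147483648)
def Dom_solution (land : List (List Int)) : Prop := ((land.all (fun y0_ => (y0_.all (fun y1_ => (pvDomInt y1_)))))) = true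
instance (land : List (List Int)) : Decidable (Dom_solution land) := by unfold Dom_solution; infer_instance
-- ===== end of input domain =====

-- B replaces A's in-place BFS relabeling (queue + column→label-set dict) by per-component
-- saturation over an immutable oil-cell list — an alternative algorithm, not claimed faster.
-- A mutates `land` in place (relabels oil cells); the equivalence is about the return value only.

-- ===== PORT A =====
-- 2-d read land[n][m] / write land[n][m] = v; every use in both ports is guarded
-- 0 ≤ index < length, where `.toNat` indexing agrees exactly with Python's.
def pvGet2 (g : List (List Int)) (n m : Int) : Int := (g.getD n.toNat []).getD m.toNat 0
def pvSet2 (g : List (List Int)) (n m v : Int) : List (List Int) :=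
  g.set n.toNat ((g.getD n.toNat []).set m.toNat v)

def pvPos : List (Int × Int) := [(0, -1), (-1, 0), (1, 0), (0, 1)]

-- body of `for k in range(4)`; state (land, landDic, queue, oil)
def pvStepA (cnt x y : Int)
    (st : List (List Int) × PySem.Dict Int (PySem.Set Int) × List (Int × Int) × Int)
    (d : Int × Int) :
    List (List Int) × PySem.Dict Int (PySem.Set Int) × List (Int × Int) × Int :=
  let (g, ld, q, oil) := st
  let nx := x + d.1
  let ny := y + d.2
  if 0 ≤ nx ∧ nx < (g.length : Int) ∧ 0 ≤ ny ∧ ny < ((g.headD []).length : Int) ∧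
      pvGet2 g nx ny = 1 then
    (pvSet2 g nx ny cnt,
     ld.insert ny (PySem.Set.add ((ld.get? ny).getD PySem.Set.empty) cnt),
     q ++ [(nx, ny)], oil + 1)
  else st

-- `while queue:` — fuel R*C+1 always suffices (each pop was paid by a 1→cnt marking)
def pvBfsLoop (cnt : Int) :
    Nat → List (List Int) × PySem.Dict Int (PySem.Set Int) × List (Int × Int) × Int →
    Int × List (List Int) × PySem.Dict Int (PySem.Set Int)
  | 0, (g, ld, _, oil) => (oil, g, ld)
  | f + 1, (g, ld, q, oil) =>
    match q with
    | [] => (oil, g, ld)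
    | (x, y) :: q' => pvBfsLoop cnt f (pvPos.foldl (pvStepA cnt x y) (g, ld, q', oil))

def pvBfs (g : List (List Int)) (ld : PySem.Dict Int (PySem.Set Int)) (cnt n m : Int) :
    Int × List (List Int) × PySem.Dict Int (PySem.Set Int) :=
  let ld1 := ld.insert m (PySem.Set.add ((ld.get? m).getD PySem.Set.empty) cnt)
  let g1 := pvSet2 g n m cnt
  pvBfsLoop cnt (g.length * (g.headD []).length + 1) (g1, ld1, [(n, m)], 1)

-- state (land, dic, landDic, cnt); on land = [] Python raises IndexError at len(land[0]) (outside Pre_)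
def solution (land : List (List Int)) : Int :=
  let fin := (PySem.List.pyRange 0 ((land.headD []).length : Int) 1).foldl (fun st i =>
      (PySem.List.pyRange 0 (land.length : Int) 1).foldl (fun st j =>
        let (g, dic, ld, cnt) := st
        if pvGet2 g j i = 1 then
          let r := pvBfs g ld cnt j i
          (r.2.1, dic.insert cnt r.1, r.2.2, cnt + 1)
        else st) st)
    (land, (PySem.Dict.empty : PySem.Dict Int Int),
     (PySem.Dict.empty : PySem.Dict Int (PySem.Set Int)), (2 : Int))
  -- `for v in landDic.values(): tmp = Σ dic[i]; answer = max(answer, tmp)` (dic[i] always present;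
  -- the sum over the set v does not depend on iteration order)
  fin.2.2.1.values.foldl (fun ans v => max ans (v.foldl (fun t l => t + fin.2.1.getD l 0) 0)) 0

-- ===== PORT B =====
def pvDirs : List (Int × Int) := [(0, 1), (0, -1), (1, 0), (-1, 0)]

-- one pass `for x, y in list(comp)` over the snapshot; state (comp, member, grown)
def pvGrowOnce (oilS : PySem.Set (Int × Int)) (comp : List (Int × Int))
    (member : PySem.Set (Int × Int)) :
    List (Int × Int) × PySem.Set (Int × Int) × Bool :=
  comp.foldl (fun st c =>
    pvDirs.foldl (fun (st : List (Int × Int) × PySem.Set (Int × Int) × Bool) d =>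
      let n := (c.1 + d.1, c.2 + d.2)
      if PySem.Set.contains oilS n && !PySem.Set.contains st.2.1 n then
        (st.1 ++ [n], PySem.Set.add st.2.1 n, true)
      else st) st) (comp, member, false)

-- `for _ in range(len(oil)+1): … if not grown: break`
def pvCompLoop (oilS : PySem.Set (Int × Int)) :
    Nat → List (Int × Int) → PySem.Set (Int × Int) → List (Int × Int)
  | 0, comp, _ => comp
  | f + 1, comp, member =>
    let r := pvGrowOnce oilS comp member
    if r.2.2 then pvCompLoop oilS f r.1 r.2.1 else r.1

def pvComponent (oilS : PySem.Set (Int × Int)) (nOil : Nat) (c : Int × Int) : List (Int × Int) :=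
  pvCompLoop oilS (nOil + 1) [c] (PySem.Set.add PySem.Set.empty c)

def solution_alt (land : List (List Int)) : Int :=
  let rows : Int := (land.length : Int)
  let cols : Int := if land = [] then 0 else ((land.headD []).length : Int)
  let oil : List (Int × Int) :=
    (PySem.List.pyRange 0 rows 1).foldl (fun acc j =>
      (PySem.List.pyRange 0 cols 1).foldl (fun acc i =>
        if pvGet2 land j i = 1 then acc ++ [(j, i)] else acc) acc) []
  let oilS := PySem.Set.ofList oil
  let cs := oil.foldl (fun (cs : List (List (Int × Int)) × PySem.Set (Int × Int)) c =>
      if PySem.Set.contains cs.2 c then cs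
      else
        let k := pvComponent oilS oil.length c
        (cs.1 ++ [k], PySem.Set.update cs.2 k))
    ([], PySem.Set.empty)
  (PySem.List.pyRange 0 cols 1).foldl (fun best i =>
    max best ((cs.1.filter (fun k => k.any (fun c => c.2 == i))).foldl
      (fun t k => t + (k.length : Int)) 0)) 0

-- ===== PRECONDITION & SPEC =====
-- A raises IndexError on land = [] and (via land[j][i] with i < len(land[0])) whenever some
-- row is shorter than the first row; outside that A returns normally, so Pre_ excludes exactly those.
def Pre_solution (land : List (List Int)) : Prop :=
  land ≠ [] ∧ ∀ r ∈ land, (land.headD []).length ≤ r.length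
instance (land : List (List Int)) : Decidable (Pre_solution land) := by
  unfold Pre_solution; infer_instance

def pvWitness_solution : List (List Int) := [[1, 0], [1, 1]]

def Spec_solution (land : List (List Int)) (out : Int) : Prop := out = solution_alt land
instance (land : List (List Int)) (out : Int) : Decidable (Spec_solution land out) := by
  unfold Spec_solution; infer_instance

-- ===== CLAIM (what is proved, stated in full; the proofs are below) =====
def Claim_equal_solution : Prop :=
  ∀ (land : List (List Int)), Dom_solution land → Pre_solution land →
    Spec_solution land (solution land)
-- ===== LEMMAS AND PROOFS =====
-- ---------- abstract layer: oil cells, adjacency, connected components ----------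
def pvCn (land : List (List Int)) : Nat := (land.headD []).length

def pvOil (land : List (List Int)) (c : Int × Int) : Prop :=
  0 ≤ c.1 ∧ c.1 < (land.length : Int) ∧ 0 ≤ c.2 ∧ c.2 < (pvCn land : Int) ∧
    pvGet2 land c.1 c.2 = 1

def pvAdj (land : List (List Int)) (c d : Int × Int) : Prop :=
  pvOil land c ∧ pvOil land d ∧ (c.1 - d.1).natAbs + (c.2 - d.2).natAbs = 1

def pvReach (land : List (List Int)) : (Int × Int) → (Int × Int) → Prop :=
  Relation.ReflTransGen (pvAdj land)

theorem pvAdj_symm {land : List (List Int)} {c d : Int × Int} (h : pvAdj land c d) :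
    pvAdj land d c := by
  obtain ⟨h1, h2, h3⟩ := h
  exact ⟨h2, h1, by omega⟩

theorem pvReach_symm {land : List (List Int)} {c d : Int × Int} (h : pvReach land c d) :
    pvReach land d c := by
  induction h with
  | refl => exact .refl
  | tail _ hbc ih => exact Relation.ReflTransGen.head (pvAdj_symm hbc) ih

theorem pvReach_oil_right {land : List (List Int)} {c d : Int × Int} (h : pvReach land c d) :
    c = d ∨ pvOil land d := by
  induction h with
  | refl => exact Or.inl rfl
  | tail _ hbc _ => exact Or.inr hbc.2.1

theorem pvReach_closed {land : List (List Int)} {S : Int × Int → Prop}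
    (hcl : ∀ c, S c → ∀ d, pvAdj land c d → S d) {a b : Int × Int}
    (ha : S a) (h : pvReach land a b) : S b := by
  induction h with
  | refl => exact ha
  | tail _ hbc ih => exact hcl _ ih _ hbc

theorem pvAdj_iff_dirs {land : List (List Int)} {c d : Int × Int} :
    pvAdj land c d ↔ pvOil land c ∧ pvOil land d ∧
      ∃ δ ∈ pvDirs, d = (c.1 + δ.1, c.2 + δ.2) := by
  obtain ⟨c1, c2⟩ := c; obtain ⟨d1, d2⟩ := d
  constructor
  · rintro ⟨h1, h2, h3⟩
    refine ⟨h1, h2, ?_⟩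
    simp only [] at h3
    have hc : (d1 = c1 ∧ (d2 = c2 + 1 ∨ d2 = c2 - 1)) ∨
        (d2 = c2 ∧ (d1 = c1 + 1 ∨ d1 = c1 - 1)) := by omega
    rcases hc with ⟨h4, h5 | h5⟩ | ⟨h4, h5 | h5⟩
    · exact ⟨(0, 1), by simp [pvDirs], by simp; omega⟩
    · exact ⟨(0, -1), by simp [pvDirs], by simp; omega⟩
    · exact ⟨(1, 0), by simp [pvDirs], by simp; omega⟩
    · exact ⟨(-1, 0), by simp [pvDirs], by simp; omega⟩
  · rintro ⟨h1, h2, δ, hδ, heq⟩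
    refine ⟨h1, h2, ?_⟩
    simp only [pvDirs, List.mem_cons, List.not_mem_nil, or_false] at hδ
    rcases hδ with rfl | rfl | rfl | rfl <;> simp only [Prod.mk.injEq] at heq ⊢ <;> omega

theorem pvAdj_iff_pos {land : List (List Int)} {c d : Int × Int} :
    pvAdj land c d ↔ pvOil land c ∧ pvOil land d ∧
      ∃ δ ∈ pvPos, d = (c.1 + δ.1, c.2 + δ.2) := by
  obtain ⟨c1, c2⟩ := c; obtain ⟨d1, d2⟩ := d
  constructor
  · rintro ⟨h1, h2, h3⟩
    refine ⟨h1, h2, ?_⟩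
    simp only [] at h3
    have hc : (d1 = c1 ∧ (d2 = c2 + 1 ∨ d2 = c2 - 1)) ∨
        (d2 = c2 ∧ (d1 = c1 + 1 ∨ d1 = c1 - 1)) := by omega
    rcases hc with ⟨h4, h5 | h5⟩ | ⟨h4, h5 | h5⟩
    · exact ⟨(0, 1), by simp [pvPos], by simp; omega⟩
    · exact ⟨(0, -1), by simp [pvPos], by simp; omega⟩
    · exact ⟨(1, 0), by simp [pvPos], by simp; omega⟩
    · exact ⟨(-1, 0), by simp [pvPos], by simp; omega⟩
  · rintro ⟨h1, h2, δ, hδ, heq⟩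
    refine ⟨h1, h2, ?_⟩
    simp only [pvPos, List.mem_cons, List.not_mem_nil, or_false] at hδ
    rcases hδ with rfl | rfl | rfl | rfl <;> simp only [Prod.mk.injEq] at heq ⊢ <;> omega

-- the list of oil cells in row-major order
def pvOilList (land : List (List Int)) : List (Int × Int) :=
  (PySem.List.pyRange 0 (land.length : Int) 1).flatMap (fun j =>
    ((PySem.List.pyRange 0 ((pvCn land : Nat) : Int) 1).filter
      (fun i => decide (pvGet2 land j i = 1))).map (fun i => (j, i)))

theorem mem_pvOilList {land : List (List Int)} {c : Int × Int} :
    c ∈ pvOilList land ↔ pvOil land c := by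
  simp only [pvOilList, List.mem_flatMap, List.mem_map, List.mem_filter,
    PySem.List.mem_pyRange_one, decide_eq_true_eq, pvOil]
  constructor
  · rintro ⟨j, ⟨hj0, hjl⟩, i, ⟨⟨hi0, hic⟩, hval⟩, rfl⟩
    exact ⟨hj0, hjl, hi0, hic, hval⟩
  · rintro ⟨h1, h2, h3, h4, h5⟩
    exact ⟨c.1, ⟨h1, h2⟩, c.2, ⟨⟨h3, h4⟩, h5⟩, rfl⟩

theorem length_pvOilList_le (land : List (List Int)) :
    (pvOilList land).length ≤ land.length * pvCn land := by
  rw [pvOilList, List.length_flatMap]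
  calc ((PySem.List.pyRange 0 (land.length : Int) 1).map (fun j =>
          (((PySem.List.pyRange 0 ((pvCn land : Nat) : Int) 1).filter
            (fun i => decide (pvGet2 land j i = 1))).map (fun i => ((j, i) : Int × Int))).length)).sum
      ≤ ((PySem.List.pyRange 0 (land.length : Int) 1).map (fun j =>
          (((PySem.List.pyRange 0 ((pvCn land : Nat) : Int) 1).filter
            (fun i => decide (pvGet2 land j i = 1))).map (fun i => ((j, i) : Int × Int))).length)).length * pvCn land := by
        apply List.sum_le_card_nsmul
        intro x hx
        obtain ⟨j, _, rfl⟩ := List.mem_map.mp hx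
        rw [List.length_map]
        calc (List.filter _ _).length ≤ (PySem.List.pyRange 0 ((pvCn land : Nat) : Int) 1).length :=
              List.length_filter_le _ _
          _ = pvCn land := by rw [PySem.List.length_pyRange_one]; omega
    _ = land.length * pvCn land := by
        rw [List.length_map, PySem.List.length_pyRange_one]
        simp

def pvIsClass (land : List (List Int)) (K : List (Int × Int)) : Prop :=
  K.Nodup ∧ ∃ a, pvOil land a ∧ ∀ d, (d ∈ K ↔ pvReach land a d)

def pvIsCompList (land : List (List Int)) (L : List (List (Int × Int))) : Prop :=
  (∀ K ∈ L, pvIsClass land K) ∧ (∀ c, pvOil land c → ∃ K ∈ L, c ∈ K) ∧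
    L.Pairwise (fun K K' => ∀ x, x ∈ K → x ∉ K')

def pvColSum (L : List (List (Int × Int))) (y : Int) : Int :=
  ((L.filter (fun K => K.any (fun c => c.2 == y))).map (fun K => (K.length : Int))).sum

theorem pvColSum_bridge {land : List (List Int)} {L1 L2 : List (List (Int × Int))}
    (h1 : pvIsCompList land L1) (h2 : pvIsCompList land L2) (y : Int) :
    pvColSum L1 y = pvColSum L2 y := by
  have char : ∀ (L : List (List (Int × Int))), pvIsCompList land L → ∀ F : Finset (Int × Int),
      (F ∈ L.map List.toFinset ↔ ∃ c, pvOil land c ∧ ∀ d, (d ∈ F ↔ pvReach land c d)) := by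
    intro L hL F
    constructor
    · intro hF
      obtain ⟨K, hK, rfl⟩ := List.mem_map.mp hF
      obtain ⟨hnd, a, ha, hcl⟩ := hL.1 K hK
      exact ⟨a, ha, fun d => by rw [List.mem_toFinset]; exact hcl d⟩
    · rintro ⟨c, hc, hF⟩
      obtain ⟨K, hK, hcK⟩ := hL.2.1 c hc
      obtain ⟨hnd, a, ha, hcl⟩ := hL.1 K hK
      have hac : pvReach land a c := (hcl c).mp hcK
      refine List.mem_map.mpr ⟨K, hK, ?_⟩
      ext d
      rw [List.mem_toFinset, hcl d, hF d]
      exact ⟨fun h => (pvReach_symm hac).trans h, fun h => hac.trans h⟩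
  have nd : ∀ (L : List (List (Int × Int))), pvIsCompList land L →
      (L.map List.toFinset).Nodup := by
    intro L hL
    have hP : L.Pairwise (fun K K' => K.toFinset ≠ K'.toFinset) := by
      refine List.Pairwise.imp_of_mem ?_ hL.2.2
      intro K K' hK hK' hdisj heq
      obtain ⟨hnd, a, ha, hcl⟩ := hL.1 K hK
      have haK : a ∈ K := (hcl a).mpr .refl
      exact hdisj a haK (List.mem_toFinset.mp (heq ▸ List.mem_toFinset.mpr haK))
    exact List.pairwise_map.mpr hP
  have hperm : (L1.map List.toFinset).Perm (L2.map List.toFinset) :=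
    (List.perm_ext_iff_of_nodup (nd L1 h1) (nd L2 h2)).mpr
      (fun F => (char L1 h1 F).trans (char L2 h2 F).symm)
  have key : ∀ (L : List (List (Int × Int))), pvIsCompList land L → pvColSum L y =
      (((L.map List.toFinset).filter (fun F => decide (∃ x ∈ F, x.2 = y))).map
        (fun F => (F.card : Int))).sum := by
    intro L hL
    unfold pvColSum
    rw [List.filter_map, List.map_map]
    have hfil : L.filter (fun K => K.any (fun c => c.2 == y)) =
        L.filter ((fun F => decide (∃ x ∈ F, x.2 = y)) ∘ List.toFinset) := by
      apply List.filter_congr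
      intro K _
      rw [Function.comp_apply, Bool.eq_iff_iff]
      simp [List.any_eq_true, List.mem_toFinset]
    rw [← hfil]
    apply congrArg
    apply List.map_congr_left
    intro K hK
    have hnd := (hL.1 K (List.mem_of_mem_filter hK)).1
    simp [List.toFinset_card_of_nodup hnd]
  rw [key L1 h1, key L2 h2]
  exact ((hperm.filter _).map _).sum_eq

theorem pv_foldl_max_le (xs : List Int) (f : Int → Int) (a c : Int) (ha : a ≤ c)
    (h : ∀ x ∈ xs, f x ≤ c) : xs.foldl (fun acc x => max acc (f x)) a ≤ c := by
  induction xs generalizing a with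
  | nil => exact ha
  | cons x t ih =>
    exact ih _ (max_le ha (h x (by simp))) (fun z hz => h z (by simp [hz]))
-- ---------- B-side: the saturation loop computes connected components ----------
theorem pv_foldl_pairs {α β σ : Type} (l : List α) (m : List β) (f : σ → α → β → σ) (s : σ) :
    l.foldl (fun s c => m.foldl (fun s d => f s c d) s) s
      = (l.flatMap (fun c => m.map (Prod.mk c))).foldl (fun s p => f s p.1 p.2) s := by
  induction l generalizing s with
  | nil => rfl
  | cons c t ih =>
    simp only [List.foldl_cons, List.flatMap_cons, List.foldl_append, List.foldl_map]
    exact ih _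

theorem pv_growScan (oilS : PySem.Set (Int × Int)) :
    ∀ (ps : List ((Int × Int) × (Int × Int))) (cl : List (Int × Int)) (gr : Bool),
    ∃ (new : List (Int × Int)) (gr' : Bool),
      ps.foldl (fun st p =>
        if PySem.Set.contains oilS (p.1.1 + p.2.1, p.1.2 + p.2.2) &&
            !PySem.Set.contains st.2.1 (p.1.1 + p.2.1, p.1.2 + p.2.2) then
          (st.1 ++ [(p.1.1 + p.2.1, p.1.2 + p.2.2)],
           PySem.Set.add st.2.1 (p.1.1 + p.2.1, p.1.2 + p.2.2), true)
        else st) (cl, cl, gr) = (cl ++ new, cl ++ new, gr') ∧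
      (cl.Nodup → (cl ++ new).Nodup) ∧
      (∀ n ∈ new, n ∈ oilS ∧ ∃ p ∈ ps, n = (p.1.1 + p.2.1, p.1.2 + p.2.2)) ∧
      (gr' = false → new = [] ∧
        ∀ p ∈ ps, ((p.1.1 + p.2.1, p.1.2 + p.2.2) : Int × Int) ∈ oilS →
          ((p.1.1 + p.2.1, p.1.2 + p.2.2) : Int × Int) ∈ cl) ∧
      (gr = true → gr' = true) ∧ (gr' = true → gr = true ∨ new ≠ []) := by
  intro ps
  induction ps with
  | nil =>
    intro cl gr
    exact ⟨[], gr, by simp, by simp, by simp, fun _ => ⟨rfl, by simp⟩, fun h => h,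
      fun h => Or.inl h⟩
  | cons p ps ih =>
    intro cl gr
    set n : Int × Int := (p.1.1 + p.2.1, p.1.2 + p.2.2) with hn
    by_cases hc : (PySem.Set.contains oilS n && !PySem.Set.contains cl n) = true
    · have hparts := (Bool.and_eq_true _ _).mp hc
      have hoil : n ∈ oilS := (PySem.Set.contains_iff _ _).mp hparts.1
      have hcontf : PySem.Set.contains cl n = false := by simpa using hparts.2
      have hmem : n ∉ cl := by
        intro hmem
        have := (PySem.Set.contains_iff cl n).mpr hmem
        rw [hcontf] at this
        exact Bool.false_ne_true this
      have hadd : PySem.Set.add cl n = cl ++ [n] := by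
        rw [PySem.Set.add, hcontf]
        simp
      obtain ⟨new', gr', heq, hnd, hnew, hfalse, hmono, hgrew⟩ := ih (cl ++ [n]) true
      have hndcl : cl.Nodup → (cl ++ [n]).Nodup := by
        intro h
        rw [List.nodup_append]
        refine ⟨h, List.nodup_singleton _, ?_⟩
        intro x hx y hy
        rw [List.mem_singleton] at hy
        exact fun he => hmem ((he.trans hy) ▸ hx)
      refine ⟨n :: new', gr', ?_, ?_, ?_, ?_, fun _ => hmono rfl, fun _ => Or.inr (by simp)⟩
      · rw [List.foldl_cons]
        rw [if_pos hc]
        show List.foldl _ (cl ++ [n], PySem.Set.add cl n, true) ps = (cl ++ n :: new', cl ++ n :: new', gr')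
        rw [hadd, heq]
        simp
      · intro h
        have := hnd (hndcl h)
        simpa using this
      · intro m hm
        rcases List.mem_cons.mp hm with rfl | hm'
        · exact ⟨hoil, p, List.mem_cons_self .., rfl⟩
        · obtain ⟨ho, q, hq, hrfl⟩ := hnew m hm'
          exact ⟨ho, q, List.mem_cons_of_mem _ hq, hrfl⟩
      · intro h
        exact absurd (hmono rfl) (by simp [h])
    · obtain ⟨new', gr', heq, hnd, hnew, hfalse, hmono, hgrew⟩ := ih cl gr
      refine ⟨new', gr', ?_, hnd, ?_, ?_, hmono, hgrew⟩
      · rw [List.foldl_cons]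
        rw [if_neg hc]
        exact heq
      · intro m hm
        obtain ⟨ho, q, hq, hrfl⟩ := hnew m hm
        exact ⟨ho, q, List.mem_cons_of_mem _ hq, hrfl⟩
      · intro h
        obtain ⟨h1, h2⟩ := hfalse h
        refine ⟨h1, ?_⟩
        intro q hq hqo
        rcases List.mem_cons.mp hq with rfl | hq'
        · by_contra hnotin
          apply hc
          simp only [Bool.and_eq_true, Bool.not_eq_true']
          refine ⟨(PySem.Set.contains_iff _ _).mpr hqo, ?_⟩
          rw [← Bool.not_eq_true, PySem.Set.contains_iff]
          exact hnotin
        · exact h2 q hq' hqo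
theorem pv_growOnce_spec (oilS : PySem.Set (Int × Int)) (cl : List (Int × Int)) :
    ∃ (new : List (Int × Int)) (gr' : Bool),
      pvGrowOnce oilS cl cl = (cl ++ new, cl ++ new, gr') ∧
      (cl.Nodup → (cl ++ new).Nodup) ∧
      (∀ n ∈ new, n ∈ oilS ∧ ∃ c ∈ cl, ∃ δ ∈ pvDirs, n = (c.1 + δ.1, c.2 + δ.2)) ∧
      (gr' = false → new = [] ∧ ∀ c ∈ cl, ∀ δ ∈ pvDirs,
        ((c.1 + δ.1, c.2 + δ.2) : Int × Int) ∈ oilS →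
          ((c.1 + δ.1, c.2 + δ.2) : Int × Int) ∈ cl) ∧
      (gr' = true → new ≠ []) := by
  obtain ⟨new, gr', heq, hnd, hnew, hfalse, _, hgrew⟩ :=
    pv_growScan oilS (cl.flatMap (fun c => pvDirs.map (Prod.mk c))) cl false
  refine ⟨new, gr', ?_, hnd, ?_, ?_, ?_⟩
  · calc pvGrowOnce oilS cl cl
        = (cl.flatMap (fun c => pvDirs.map (Prod.mk c))).foldl (fun st p =>
            if PySem.Set.contains oilS (p.1.1 + p.2.1, p.1.2 + p.2.2) &&
                !PySem.Set.contains st.2.1 (p.1.1 + p.2.1, p.1.2 + p.2.2) then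
              (st.1 ++ [(p.1.1 + p.2.1, p.1.2 + p.2.2)],
               PySem.Set.add st.2.1 (p.1.1 + p.2.1, p.1.2 + p.2.2), true)
            else st) (cl, cl, false) := by
          rw [pvGrowOnce, pv_foldl_pairs (f := fun st (c d : Int × Int) =>
            if PySem.Set.contains oilS (c.1 + d.1, c.2 + d.2) &&
                !PySem.Set.contains st.2.1 (c.1 + d.1, c.2 + d.2) then
              (st.1 ++ [((c.1 + d.1, c.2 + d.2) : Int × Int)],
               PySem.Set.add st.2.1 (c.1 + d.1, c.2 + d.2), true)
            else st)]
      _ = (cl ++ new, cl ++ new, gr') := heq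
  · intro n hn
    obtain ⟨ho, p, hp, hrfl⟩ := hnew n hn
    obtain ⟨c, hc, δ, hδ, hpe⟩ := by
      simpa only [List.mem_flatMap, List.mem_map] using hp
    exact ⟨ho, c, hc, δ, hδ, by rw [hrfl, ← hpe]⟩
  · intro h
    obtain ⟨h1, h2⟩ := hfalse h
    refine ⟨h1, ?_⟩
    intro c hc δ hδ hoil
    have hpmem : ((c, δ) : (Int × Int) × (Int × Int)) ∈
        cl.flatMap (fun c => pvDirs.map (Prod.mk c)) := by
      simp only [List.mem_flatMap, List.mem_map]
      exact ⟨c, hc, δ, hδ, rfl⟩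
    exact h2 (c, δ) hpmem hoil
  · intro h
    rcases hgrew h with h' | h'
    · exact absurd h' (by simp)
    · exact h'

theorem pv_compLoop_spec (land : List (List Int)) (oilS : PySem.Set (Int × Int))
    (hOilS : ∀ n, n ∈ oilS ↔ pvOil land n) (s : Int × Int) (hs : pvOil land s) :
    ∀ (f : Nat) (cl : List (Int × Int)), cl.Nodup → s ∈ cl →
      (∀ n ∈ cl, pvReach land s n) →
      (pvOilList land).length + 1 ≤ f + cl.length →
      (pvCompLoop oilS f cl cl).Nodup ∧
        ∀ d, (d ∈ pvCompLoop oilS f cl cl ↔ pvReach land s d) := by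
  intro f
  induction f with
  | zero =>
    intro cl hnd hscl hreach hfuel
    exfalso
    have hsub : cl ⊆ pvOilList land := by
      intro x hx
      rcases pvReach_oil_right (hreach x hx) with h | ho
      · exact mem_pvOilList.mpr (h ▸ hs)
      · exact mem_pvOilList.mpr ho
    have := (List.subperm_of_subset hnd hsub).length_le
    omega
  | succ f ih =>
    intro cl hnd hscl hreach hfuel
    obtain ⟨new, gr', heq, hnd', hnew, hfalse, hgrew⟩ := pv_growOnce_spec oilS cl
    have hstep : pvCompLoop oilS (f + 1) cl cl =
        if gr' = true then pvCompLoop oilS f (cl ++ new) (cl ++ new) else cl ++ new := by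
      simp only [pvCompLoop, heq]
    cases gr' with
    | false =>
      obtain ⟨hnil, hclosed⟩ := hfalse rfl
      rw [hstep]
      simp only [Bool.false_eq_true, if_false, hnil, List.append_nil]
      refine ⟨hnd, fun d => ⟨fun hd => hreach d hd, fun hr => ?_⟩⟩
      have hcl : ∀ c, c ∈ cl → ∀ d, pvAdj land c d → d ∈ cl := by
        intro c hc d hadj
        rw [pvAdj_iff_dirs] at hadj
        obtain ⟨h1, h2, δ, hδ, rfl⟩ := hadj
        exact hclosed c hc δ hδ ((hOilS _).mpr h2)
      exact pvReach_closed hcl hscl hr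
    | true =>
      rw [hstep]
      simp only [if_true]
      have hreach' : ∀ n ∈ cl ++ new, pvReach land s n := by
        intro n hn
        rcases List.mem_append.mp hn with h | h
        · exact hreach n h
        · obtain ⟨ho, c, hc, δ, hδ, rfl⟩ := hnew n h
          have hoilc : pvOil land c := by
            rcases pvReach_oil_right (hreach c hc) with h2 | h2
            · exact h2 ▸ hs
            · exact h2
          exact (hreach c hc).tail
            (pvAdj_iff_dirs.mpr ⟨hoilc, (hOilS _).mp ho, δ, hδ, rfl⟩)
      have hlen : 1 ≤ new.length := by
        have := hgrew rfl
        cases new with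
        | nil => exact absurd rfl this
        | cons a l => simp
      exact ih (cl ++ new) (hnd' hnd) (List.mem_append.mpr (Or.inl hscl)) hreach'
        (by rw [List.length_append]; omega)

theorem pv_component_spec (land : List (List Int)) (oilS : PySem.Set (Int × Int))
    (hOilS : ∀ n, n ∈ oilS ↔ pvOil land n) (c : Int × Int) (hc : pvOil land c)
    (N : Nat) (hN : (pvOilList land).length ≤ N) :
    (pvComponent oilS N c).Nodup ∧ ∀ d, (d ∈ pvComponent oilS N c ↔ pvReach land c d) := by
  have hinit : PySem.Set.add PySem.Set.empty c = [c] := by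
    rw [PySem.Set.add]; simp [PySem.Set.empty]
  rw [pvComponent, hinit]
  exact pv_compLoop_spec land oilS hOilS c hc (N + 1) [c] (List.nodup_singleton c)
    (List.mem_singleton_self c) (by intro n hn; rw [List.mem_singleton] at hn; exact hn ▸ .refl)
    (by simp; omega)

theorem pv_compsFold_spec (land : List (List Int)) (k : (Int × Int) → List (Int × Int))
    (hk : ∀ c, pvOil land c → (k c).Nodup ∧ ∀ d, (d ∈ k c ↔ pvReach land c d)) :
    ∀ (l : List (Int × Int)) (cs : List (List (Int × Int)) × PySem.Set (Int × Int)),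
      (∀ c ∈ l, pvOil land c) →
      (∀ K ∈ cs.1, pvIsClass land K) →
      cs.1.Pairwise (fun K K' => ∀ x, x ∈ K → x ∉ K') →
      (∀ n, n ∈ cs.2 ↔ ∃ K ∈ cs.1, n ∈ K) →
      (∀ K ∈ (l.foldl (fun cs c => if PySem.Set.contains cs.2 c then cs
          else (cs.1 ++ [k c], PySem.Set.update cs.2 (k c))) cs).1, pvIsClass land K) ∧
      (l.foldl (fun cs c => if PySem.Set.contains cs.2 c then cs
          else (cs.1 ++ [k c], PySem.Set.update cs.2 (k c))) cs).1.Pairwise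
        (fun K K' => ∀ x, x ∈ K → x ∉ K') ∧
      (∀ n, n ∈ (l.foldl (fun cs c => if PySem.Set.contains cs.2 c then cs
          else (cs.1 ++ [k c], PySem.Set.update cs.2 (k c))) cs).2 ↔
        ∃ K ∈ (l.foldl (fun cs c => if PySem.Set.contains cs.2 c then cs
          else (cs.1 ++ [k c], PySem.Set.update cs.2 (k c))) cs).1, n ∈ K) ∧
      (∀ c ∈ l, ∃ K ∈ (l.foldl (fun cs c => if PySem.Set.contains cs.2 c then cs
          else (cs.1 ++ [k c], PySem.Set.update cs.2 (k c))) cs).1, c ∈ K) ∧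
      (∀ K ∈ cs.1, K ∈ (l.foldl (fun cs c => if PySem.Set.contains cs.2 c then cs
          else (cs.1 ++ [k c], PySem.Set.update cs.2 (k c))) cs).1) := by
  intro l
  induction l with
  | nil =>
    intro cs hoil hcls hpw hseen
    exact ⟨hcls, hpw, hseen, by simp, fun K hK => hK⟩
  | cons c l ih =>
    intro cs hoil hcls hpw hseen
    have hoilc : pvOil land c := hoil c (List.mem_cons_self ..)
    by_cases hcon : PySem.Set.contains cs.2 c = true
    · have hcs : c ∈ cs.2 := (PySem.Set.contains_iff _ _).mp hcon
      rw [List.foldl_cons, if_pos hcon]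
      obtain ⟨h1, h2, h3, h4, h5⟩ := ih cs (fun x hx => hoil x (List.mem_cons_of_mem _ hx))
        hcls hpw hseen
      refine ⟨h1, h2, h3, ?_, h5⟩
      intro x hx
      rcases List.mem_cons.mp hx with rfl | hx'
      · obtain ⟨K, hK, hxK⟩ := (hseen _).mp hcs
        exact ⟨K, h5 K hK, hxK⟩
      · exact h4 x hx'
    · have hcs : c ∉ cs.2 := fun h => hcon ((PySem.Set.contains_iff _ _).mpr h)
      rw [List.foldl_cons, if_neg hcon]
      have hkc := hk c hoilc
      have hcls' : ∀ K ∈ cs.1 ++ [k c], pvIsClass land K := by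
        intro K hK
        rcases List.mem_append.mp hK with h | h
        · exact hcls K h
        · rw [List.mem_singleton] at h
          exact h ▸ ⟨hkc.1, c, hoilc, hkc.2⟩
      have hdisj : ∀ K ∈ cs.1, ∀ x, x ∈ K → x ∉ k c := by
        intro K hK x hxK hxkc
        obtain ⟨hnd, a, ha, hchar⟩ := hcls K hK
        have hax : pvReach land a x := (hchar x).mp hxK
        have hcx : pvReach land c x := (hkc.2 x).mp hxkc
        have hac : pvReach land a c := hax.trans (pvReach_symm hcx)
        exact hcs ((hseen _).mpr ⟨K, hK, (hchar c).mpr hac⟩)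
      have hpw' : (cs.1 ++ [k c]).Pairwise (fun K K' => ∀ x, x ∈ K → x ∉ K') := by
        rw [List.pairwise_append]
        refine ⟨hpw, List.pairwise_singleton _ _, ?_⟩
        intro K hK K' hK'
        rw [List.mem_singleton] at hK'
        exact hK' ▸ hdisj K hK
      have hseen' : ∀ n, n ∈ PySem.Set.update cs.2 (k c) ↔ ∃ K ∈ cs.1 ++ [k c], n ∈ K := by
        intro n
        rw [PySem.Set.mem_update]
        constructor
        · rintro (h | h)
          · obtain ⟨K, hK, hnK⟩ := (hseen _).mp h
            exact ⟨K, List.mem_append.mpr (Or.inl hK), hnK⟩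
          · exact ⟨k c, List.mem_append.mpr (Or.inr (List.mem_singleton_self _)), h⟩
        · rintro ⟨K, hK, hnK⟩
          rcases List.mem_append.mp hK with h | h
          · exact Or.inl ((hseen _).mpr ⟨K, h, hnK⟩)
          · rw [List.mem_singleton] at h
            exact Or.inr (h ▸ hnK)
      obtain ⟨h1, h2, h3, h4, h5⟩ := ih (cs.1 ++ [k c], PySem.Set.update cs.2 (k c))
        (fun x hx => hoil x (List.mem_cons_of_mem _ hx)) hcls' hpw' hseen'
      refine ⟨h1, h2, h3, ?_, ?_⟩
      · intro x hx
        rcases List.mem_cons.mp hx with rfl | hx'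
        · exact ⟨k x, h5 (k x) (List.mem_append.mpr (Or.inr (List.mem_singleton_self _))),
            (hkc.2 x).mpr .refl⟩
        · exact h4 x hx'
      · intro K hK
        exact h5 K (List.mem_append.mpr (Or.inl hK))
theorem pv_solution_alt_eq (land : List (List Int)) (hne : land ≠ []) :
    ∃ L, pvIsCompList land L ∧
      solution_alt land = (PySem.List.pyRange 0 ((pvCn land : Nat) : Int) 1).foldl
        (fun a y => max a (pvColSum L y)) 0 := by
  have hcols : (if land = [] then (0 : Int) else ((land.headD []).length : Int)) =
      ((pvCn land : Nat) : Int) := by rw [if_neg hne]; rfl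
  have hoil_eq : (PySem.List.pyRange 0 ((land.length : Int)) 1).foldl (fun acc j =>
      (PySem.List.pyRange 0 ((pvCn land : Nat) : Int) 1).foldl (fun acc i =>
        if pvGet2 land j i = 1 then acc ++ [((j, i) : Int × Int)] else acc) acc) []
      = pvOilList land := by
    calc (PySem.List.pyRange 0 ((land.length : Int)) 1).foldl (fun acc j =>
          (PySem.List.pyRange 0 ((pvCn land : Nat) : Int) 1).foldl (fun acc i =>
            if pvGet2 land j i = 1 then acc ++ [((j, i) : Int × Int)] else acc) acc) []
        = (PySem.List.pyRange 0 ((land.length : Int)) 1).foldl (fun acc j => acc ++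
            ((PySem.List.pyRange 0 ((pvCn land : Nat) : Int) 1).filter
              (fun i => decide (pvGet2 land j i = 1))).map (fun i => ((j, i) : Int × Int))) [] :=
          PySem.List.foldl_congr_mem _ _ _ _ (fun acc j _ => PySem.List.foldl_append_ite _ _ _ _)
      _ = pvOilList land := by
          rw [PySem.List.foldl_append_eq_flatMap, List.nil_append]; rfl
  have hOilS : ∀ n, n ∈ PySem.Set.ofList (pvOilList land) ↔ pvOil land n :=
    fun n => (PySem.Set.mem_ofList _ _).trans mem_pvOilList
  have hk : ∀ c, pvOil land c →
      (pvComponent (PySem.Set.ofList (pvOilList land)) (pvOilList land).length c).Nodup ∧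
      ∀ d, (d ∈ pvComponent (PySem.Set.ofList (pvOilList land)) (pvOilList land).length c ↔
        pvReach land c d) :=
    fun c hc => pv_component_spec land _ hOilS c hc _ le_rfl
  obtain ⟨H1, H2, H3, H4, H5⟩ := pv_compsFold_spec land
    (pvComponent (PySem.Set.ofList (pvOilList land)) (pvOilList land).length) hk
    (pvOilList land) ([], PySem.Set.empty) (fun c hc => mem_pvOilList.mp hc)
    (by simp) (by simp) (by simp [PySem.Set.empty])
  refine ⟨_, ⟨H1, fun c hc => H4 c (mem_pvOilList.mpr hc), H2⟩, ?_⟩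
  simp only [solution_alt]
  rw [hcols, hoil_eq]
  apply PySem.List.foldl_congr_mem
  intro acc y _
  congr 1
  rw [PySem.List.foldl_add]
  simp [pvColSum]
-- ---------- A-side: grid state invariant ----------
def pvInB (land : List (List Int)) (c : Int × Int) : Prop :=
  0 ≤ c.1 ∧ c.1 < (land.length : Int) ∧ 0 ≤ c.2 ∧ c.2 < (pvCn land : Int)

theorem pv_rowlen_ge {land : List (List Int)} (hPre : Pre_solution land) {j : Nat}
    (hj : j < land.length) : pvCn land ≤ (land.getD j []).length := by
  rw [List.getD_eq_getElem?_getD, List.getElem?_eq_getElem hj]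
  exact hPre.2 _ (List.getElem_mem hj)

theorem pv_getD_zero_eq_headD {α : Type} (l : List α) (d : α) : l.getD 0 d = l.headD d := by
  cases l <;> rfl

def pvGInv (land g : List (List Int)) (V : List (Int × Int)) : Prop :=
  g.length = land.length ∧
  (∀ j : Nat, j < land.length → (g.getD j []).length = (land.getD j []).length) ∧
  (∀ c : Int × Int, pvInB land c →
    ((c ∈ V → pvGet2 g c.1 c.2 ≠ 1) ∧ (c ∉ V → pvGet2 g c.1 c.2 = pvGet2 land c.1 c.2)))

theorem pvGInv_init (land : List (List Int)) : pvGInv land land [] := by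
  refine ⟨rfl, fun _ _ => rfl, fun c _ => ⟨fun h => absurd h (List.not_mem_nil), fun _ => rfl⟩⟩

theorem pvGInv_headD {land g : List (List Int)} {V : List (Int × Int)}
    (h : pvGInv land g V) (hne : land ≠ []) : (g.headD []).length = pvCn land := by
  have hl : 0 < land.length := List.length_pos_iff.mpr hne
  have := h.2.1 0 hl
  rw [pv_getD_zero_eq_headD, pv_getD_zero_eq_headD] at this
  exact this

theorem pvGInv_test {land g : List (List Int)} {V : List (Int × Int)}
    (h : pvGInv land g V) {c : Int × Int} (hc : pvInB land c) :
    (pvGet2 g c.1 c.2 = 1 ↔ (pvOil land c ∧ c ∉ V)) := by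
  constructor
  · intro h1
    by_cases hv : c ∈ V
    · exact absurd h1 ((h.2.2 c hc).1 hv)
    · refine ⟨⟨hc.1, hc.2.1, hc.2.2.1, hc.2.2.2, ?_⟩, hv⟩
      rw [← (h.2.2 c hc).2 hv]
      exact h1
  · rintro ⟨hoil, hv⟩
    rw [(h.2.2 c hc).2 hv]
    exact hoil.2.2.2.2

theorem pv_getD_set_self {α : Type} {l : List α} {i : Nat} {a d : α} (h : i < l.length) :
    (l.set i a).getD i d = a := by
  rw [List.getD_eq_getElem?_getD, List.getElem?_set_self h, Option.getD_some]

theorem pv_getD_set_ne {α : Type} {l : List α} {i j : Nat} {a d : α} (h : i ≠ j) :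
    (l.set i a).getD j d = l.getD j d := by
  rw [List.getD_eq_getElem?_getD, List.getElem?_set_ne h, ← List.getD_eq_getElem?_getD]

theorem pvGet2_pvSet2_self {g : List (List Int)} {n m : Int} {v : Int}
    (hr : n.toNat < g.length) (hc : m.toNat < (g.getD n.toNat []).length) :
    pvGet2 (pvSet2 g n m v) n m = v := by
  unfold pvGet2 pvSet2
  rw [pv_getD_set_self hr, pv_getD_set_self hc]

theorem pvGet2_pvSet2_ne {g : List (List Int)} {n m j i : Int} {v : Int}
    (h : n.toNat ≠ j.toNat ∨ m.toNat ≠ i.toNat) :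
    pvGet2 (pvSet2 g n m v) j i = pvGet2 g j i := by
  unfold pvGet2 pvSet2
  rcases h with h | h
  · rw [pv_getD_set_ne h]
  · by_cases hr : n.toNat = j.toNat
    · rw [hr]
      by_cases hlen : j.toNat < g.length
      · rw [pv_getD_set_self hlen, pv_getD_set_ne h]
      · rw [List.set_eq_of_length_le (Nat.le_of_not_lt hlen)]
    · rw [pv_getD_set_ne hr]

theorem pvSet2_length {g : List (List Int)} {n m v : Int} :
    (pvSet2 g n m v).length = g.length := List.length_set

theorem pvSet2_rowlen {g : List (List Int)} {n m v : Int} (j : Nat) :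
    ((pvSet2 g n m v).getD j []).length = (g.getD j []).length := by
  unfold pvSet2
  by_cases hr : n.toNat = j
  · subst hr
    by_cases hlen : n.toNat < g.length
    · rw [pv_getD_set_self hlen, List.length_set]
    · rw [List.set_eq_of_length_le (Nat.le_of_not_lt hlen)]
  · rw [pv_getD_set_ne hr]

theorem pv_ne_toNat {land : List (List Int)} {c n : Int × Int} (hc : pvInB land c)
    (hn : pvInB land n) (hne : c ≠ n) :
    n.1.toNat ≠ c.1.toNat ∨ n.2.toNat ≠ c.2.toNat := by
  obtain ⟨h1, h2, h3, h4⟩ := hc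
  obtain ⟨g1, g2, g3, g4⟩ := hn
  by_contra hcon
  obtain ⟨ha, hb⟩ := not_or.mp hcon
  exact hne (Prod.ext_iff.mpr ⟨by omega, by omega⟩)

theorem pvGInv_set {land g : List (List Int)} {V : List (Int × Int)} {n : Int × Int} {v : Int}
    (hPre : Pre_solution land) (h : pvGInv land g V) (hin : pvInB land n) (hnot : n ∉ V)
    (hv : v ≠ 1) : pvGInv land (pvSet2 g n.1 n.2 v) (V ++ [n]) := by
  refine ⟨by rw [pvSet2_length, h.1], fun j hj => by rw [pvSet2_rowlen, h.2.1 j hj], ?_⟩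
  intro c hc
  obtain ⟨hb1, hb2, hb3, hb4⟩ := hc
  have hc : pvInB land c := ⟨hb1, hb2, hb3, hb4⟩
  obtain ⟨hn1, hn2, hn3, hn4⟩ := hin
  have hin : pvInB land n := ⟨hn1, hn2, hn3, hn4⟩
  constructor
  · intro hcv
    rcases List.mem_append.mp hcv with hcV | hcn
    · have hne : c ≠ n := fun he => hnot (he ▸ hcV)
      rw [pvGet2_pvSet2_ne (pv_ne_toNat hc hin hne)]
      exact (h.2.2 c hc).1 hcV
    · rw [List.mem_singleton] at hcn
      subst hcn
      have hr : c.1.toNat < g.length := by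
        rw [h.1]; omega
      have hcl : c.2.toNat < (g.getD c.1.toNat []).length := by
        rw [h.2.1 _ (by omega)]
        have := pv_rowlen_ge hPre (j := c.1.toNat) (by omega)
        omega
      rw [pvGet2_pvSet2_self hr hcl]
      exact hv
  · intro hcv
    have hcV : c ∉ V := fun hx => hcv (List.mem_append.mpr (Or.inl hx))
    have hne : c ≠ n := fun he => hcv (List.mem_append.mpr (Or.inr (by rw [he]; simp)))
    rw [pvGet2_pvSet2_ne (pv_ne_toNat hc hin hne)]
    exact (h.2.2 c hc).2 hcV
-- ---------- A-side: landDic invariant ----------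
theorem pv_dict_get?_none_iff {ν : Type} (l : List (Int × ν)) (y : Int) :
    (PySem.Dict.mk l).get? y = none ↔ y ∉ (PySem.Dict.mk l).keys := by
  induction l with
  | nil => exact ⟨fun _ => by rw [PySem.Dict.keys_mk]; exact List.not_mem_nil, fun _ => rfl⟩
  | cons p rest ih =>
    obtain ⟨k, v⟩ := p
    rw [PySem.Dict.get?_mk_cons, PySem.Dict.keys_mk]
    by_cases hk : k = y
    · subst hk
      simp
    · rw [if_neg (by simpa using hk)]
      rw [ih, PySem.Dict.keys_mk]
      simp [Ne.symm hk]

theorem pv_dict_mem_items_get? {ν : Type} (l : List (Int × ν)) (y : Int) (v : ν)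
    (hnd : ((PySem.Dict.mk l).keys).Nodup) (h : (y, v) ∈ l) :
    (PySem.Dict.mk l).get? y = some v := by
  induction l with
  | nil => simp at h
  | cons p rest ih =>
    obtain ⟨k, w⟩ := p
    rw [PySem.Dict.keys_mk] at hnd
    rw [PySem.Dict.get?_mk_cons]
    rcases List.mem_cons.mp h with he | hm
    · obtain ⟨h1, h2⟩ := Prod.ext_iff.mp he
      simp only at h1 h2
      rw [if_pos (by simpa using h1.symm), h2]
    · have hky : k ≠ y := by
        intro hk
        subst hk
        have : k ∈ rest.map Prod.fst := List.mem_map.mpr ⟨(k, v), hm, rfl⟩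
        exact (List.nodup_cons.mp (by simpa using hnd)).1 this
      rw [if_neg (by simpa using hky)]
      exact ih (by rw [PySem.Dict.keys_mk]; exact (List.nodup_cons.mp (by simpa using hnd)).2) hm

theorem pv_set_nodup_add {s : PySem.Set Int} {x : Int} (h : s.Nodup) :
    (PySem.Set.add s x).Nodup := by
  rw [PySem.Set.add]
  split
  · exact h
  · rename_i hc
    rw [List.nodup_append]
    refine ⟨h, List.nodup_singleton _, ?_⟩
    intro a ha b hb
    rw [List.mem_singleton] at hb
    intro he
    exact hc ((PySem.Set.contains_iff _ _).mpr ((he.trans hb) ▸ ha))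

def pvLDC (ld : PySem.Dict Int (PySem.Set Int)) (labeled : List (Int × List (Int × Int))) : Prop :=
  ∀ y : Int,
    (ld.get? y = none → ∀ p ∈ labeled, ∀ c ∈ p.2, c.2 ≠ y) ∧
    (∀ v, ld.get? y = some v → v.Nodup ∧
      ∀ l, (l ∈ v ↔ ∃ p ∈ labeled, p.1 = l ∧ ∃ c ∈ p.2, c.2 = y))

theorem pvLDC_extend_empty {ld : PySem.Dict Int (PySem.Set Int)}
    {labeled : List (Int × List (Int × Int))} (cnt : Int) (h : pvLDC ld labeled) :
    pvLDC ld (labeled ++ [(cnt, [])]) := by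
  intro y
  refine ⟨?_, ?_⟩
  · intro hn p hp c hc
    rcases List.mem_append.mp hp with h' | h'
    · exact ((h y).1 hn) p h' c hc
    · rw [List.mem_singleton] at h'
      subst h'
      simp at hc
  · intro v hv
    obtain ⟨hnd, hchar⟩ := (h y).2 v hv
    refine ⟨hnd, fun l => (hchar l).trans ⟨?_, ?_⟩⟩
    · rintro ⟨p, hp, h1, c, hc, h2⟩
      exact ⟨p, List.mem_append.mpr (Or.inl hp), h1, c, hc, h2⟩
    · rintro ⟨p, hp, h1, c, hc, h2⟩
      rcases List.mem_append.mp hp with h' | h'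
      · exact ⟨p, h', h1, c, hc, h2⟩
      · rw [List.mem_singleton] at h'
        subst h'
        simp at hc

theorem pvLDC_step {ld : PySem.Dict Int (PySem.Set Int)}
    {done : List (Int × List (Int × Int))} {cnt : Int} {M : List (Int × Int)}
    (n : Int × Int) (h : pvLDC ld (done ++ [(cnt, M)])) :
    pvLDC (ld.insert n.2 (PySem.Set.add ((ld.get? n.2).getD PySem.Set.empty) cnt))
      (done ++ [(cnt, M ++ [n])]) := by
  intro y
  by_cases hy : y = n.2
  · subst hy
    constructor
    · intro hnone
      rw [PySem.Dict.get?_insert_self] at hnone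
      exact absurd hnone (by simp)
    · intro v hv
      rw [PySem.Dict.get?_insert_self] at hv
      obtain rfl := Option.some_injective _ hv.symm
      have hvnd : ((ld.get? n.2).getD PySem.Set.empty).Nodup := by
        cases hg : ld.get? n.2 with
        | none => simp [PySem.Set.empty]
        | some w =>
          simp only [Option.getD_some]
          exact ((h n.2).2 w hg).1
      refine ⟨pv_set_nodup_add hvnd, fun l => ?_⟩
      rw [PySem.Set.mem_add]
      constructor
      · rintro (hl | rfl)
        · cases hg : ld.get? n.2 with
          | none =>
            rw [hg] at hl
            simp [PySem.Set.empty] at hl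
          | some w =>
            rw [hg] at hl
            simp only [Option.getD_some] at hl
            obtain ⟨p, hp, h1, c, hc, h2⟩ := (((h n.2).2 w hg).2 l).mp hl
            rcases List.mem_append.mp hp with h' | h'
            · exact ⟨p, List.mem_append.mpr (Or.inl h'), h1, c, hc, h2⟩
            · rw [List.mem_singleton] at h'
              subst h'
              exact ⟨(cnt, M ++ [n]), List.mem_append.mpr (Or.inr (List.mem_singleton_self _)),
                h1, c, List.mem_append.mpr (Or.inl hc), h2⟩
        · exact ⟨(l, M ++ [n]), List.mem_append.mpr (Or.inr (List.mem_singleton_self _)),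
            rfl, n, List.mem_append.mpr (Or.inr (List.mem_singleton_self _)), rfl⟩
      · rintro ⟨p, hp, h1, c, hc, h2⟩
        rcases List.mem_append.mp hp with h' | h'
        · left
          cases hg : ld.get? n.2 with
          | none => exact absurd h2 (((h n.2).1 hg) p (List.mem_append.mpr (Or.inl h')) c hc)
          | some w =>
            simp only [Option.getD_some]
            exact (((h n.2).2 w hg).2 l).mpr ⟨p, List.mem_append.mpr (Or.inl h'), h1, c, hc, h2⟩
        · rw [List.mem_singleton] at h'
          subst h'
          simp only at h1
          exact Or.inr h1.symm
  · have hg' : (ld.insert n.2 (PySem.Set.add ((ld.get? n.2).getD PySem.Set.empty) cnt)).get? y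
        = ld.get? y := PySem.Dict.get?_insert_of_ne _ _ hy
    have htrans : ∀ p : Int × List (Int × Int),
        (p ∈ done ++ [(cnt, M ++ [n])] → ∃ q ∈ done ++ [(cnt, M)],
          q.1 = p.1 ∧ ∀ c ∈ p.2, c.2 = y → c ∈ q.2) := by
      intro p hp
      rcases List.mem_append.mp hp with h' | h'
      · exact ⟨p, List.mem_append.mpr (Or.inl h'), rfl, fun c hc _ => hc⟩
      · rw [List.mem_singleton] at h'
        subst h'
        refine ⟨(cnt, M), List.mem_append.mpr (Or.inr (List.mem_singleton_self _)), rfl, ?_⟩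
        intro c hc hcy
        rcases List.mem_append.mp hc with h'' | h''
        · exact h''
        · rw [List.mem_singleton] at h''
          subst h''
          exact absurd hcy.symm hy
    constructor
    · intro hnone p hp c hc hcy
      rw [hg'] at hnone
      obtain ⟨q, hq, h1, h2⟩ := htrans p hp
      exact ((h y).1 hnone) q hq c (h2 c hc hcy) hcy
    · intro v hv
      rw [hg'] at hv
      obtain ⟨hnd, hchar⟩ := (h y).2 v hv
      refine ⟨hnd, fun l => (hchar l).trans ⟨?_, ?_⟩⟩
      · rintro ⟨p, hp, h1, c, hc, h2⟩
        rcases List.mem_append.mp hp with h' | h'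
        · exact ⟨p, List.mem_append.mpr (Or.inl h'), h1, c, hc, h2⟩
        · rw [List.mem_singleton] at h'
          subst h'
          exact ⟨(cnt, M ++ [n]), List.mem_append.mpr (Or.inr (List.mem_singleton_self _)), h1,
            c, List.mem_append.mpr (Or.inl hc), h2⟩
      · rintro ⟨p, hp, h1, c, hc, h2⟩
        obtain ⟨q, hq, hq1, hq2⟩ := htrans p hp
        exact ⟨q, hq, hq1.symm ▸ h1, c, hq2 c hc h2, h2⟩
-- ---------- A-side: BFS inner scan over the four directions ----------
theorem pvOil_of_reach {land : List (List Int)} {s c : Int × Int} (hs : pvOil land s)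
    (h : pvReach land s c) : pvOil land c := by
  rcases pvReach_oil_right h with rfl | h'
  · exact hs
  · exact h'

theorem pvInB_of_oil {land : List (List Int)} {c : Int × Int} (h : pvOil land c) :
    pvInB land c := ⟨h.1, h.2.1, h.2.2.1, h.2.2.2.1⟩

theorem pv_keys_insert {ν : Type} (d : PySem.Dict Int ν) (k : Int) (v : ν) :
    (d.insert k v).keys = PySem.Set.add d.keys k := by
  have := PySem.Dict.keys_foldl_insert (l := [k]) (f := fun _ _ => v) (d := d)
  simpa [PySem.Set.update] using this

theorem pv_notV0_of_reach {land : List (List Int)} {V0 : List (Int × Int)} {s c : Int × Int}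
    (hV0 : ∀ c ∈ V0, ∀ d, pvAdj land c d → d ∈ V0) (hsV0 : s ∉ V0)
    (h : pvReach land s c) : c ∉ V0 := by
  intro hc
  exact hsV0 (pvReach_closed hV0 hc (pvReach_symm h))

theorem pv_bfs_scan (land : List (List Int)) (V0 : List (Int × Int))
    (done : List (Int × List (Int × Int))) (cnt : Int) (s : Int × Int)
    (hPre : Pre_solution land) (hs : pvOil land s) (hsV0 : s ∉ V0)
    (hV0 : ∀ c ∈ V0, ∀ d, pvAdj land c d → d ∈ V0) (hcnt : cnt ≠ 1) (x y : Int) :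
    ∀ (ds : List (Int × Int)), (∀ δ ∈ ds, δ ∈ pvPos) →
    ∀ (g : List (List Int)) (ld : PySem.Dict Int (PySem.Set Int)) (q : List (Int × Int))
      (oil : Int) (M : List (Int × Int)),
      pvGInv land g (V0 ++ M) → M.Nodup → pvReach land s (x, y) →
      (∀ c ∈ M, pvReach land s c) →
      pvLDC ld (done ++ [(cnt, M)]) → ld.keys.Nodup →
      (∀ y' ∈ ld.keys, 0 ≤ y' ∧ y' < (pvCn land : Int)) →
      ∃ (P : List (Int × Int)) (g' : List (List Int)) (ld' : PySem.Dict Int (PySem.Set Int)),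
        ds.foldl (pvStepA cnt x y) (g, ld, q, oil) = (g', ld', q ++ P, oil + (P.length : Int)) ∧
        pvGInv land g' (V0 ++ (M ++ P)) ∧ (M ++ P).Nodup ∧
        (∀ c ∈ P, pvReach land s c) ∧
        pvLDC ld' (done ++ [(cnt, M ++ P)]) ∧ ld'.keys.Nodup ∧
        (∀ y' ∈ ld'.keys, 0 ≤ y' ∧ y' < (pvCn land : Int)) ∧
        (∀ δ ∈ ds, pvAdj land (x, y) (x + δ.1, y + δ.2) → (x + δ.1, y + δ.2) ∈ M ++ P) := by
  intro ds
  induction ds with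
  | nil =>
    intro _ g ld q oil M hG hnd hrxy hreach hLD hk1 hk2
    exact ⟨[], g, ld, by simp, by simpa using hG, by simpa using hnd, by simp,
      by simpa using hLD, hk1, hk2, by simp⟩
  | cons δ ds ih =>
    intro hds g ld q oil M hG hnd hrxy hreach hLD hk1 hk2
    have hδ : δ ∈ pvPos := hds δ (List.mem_cons_self ..)
    have hds' : ∀ δ' ∈ ds, δ' ∈ pvPos := fun δ' h => hds δ' (List.mem_cons_of_mem _ h)
    have hoilxy : pvOil land (x, y) := pvOil_of_reach hs hrxy
    rw [List.foldl_cons]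
    show ∃ _, _
    have hstep : pvStepA cnt x y (g, ld, q, oil) δ =
        if 0 ≤ x + δ.1 ∧ x + δ.1 < (g.length : Int) ∧ 0 ≤ y + δ.2 ∧
            y + δ.2 < ((g.headD []).length : Int) ∧ pvGet2 g (x + δ.1) (y + δ.2) = 1 then
          (pvSet2 g (x + δ.1) (y + δ.2) cnt,
           ld.insert (y + δ.2)
             (PySem.Set.add ((ld.get? (y + δ.2)).getD PySem.Set.empty) cnt),
           q ++ [(x + δ.1, y + δ.2)], oil + 1)
        else (g, ld, q, oil) := rfl
    by_cases hcond : 0 ≤ x + δ.1 ∧ x + δ.1 < (g.length : Int) ∧ 0 ≤ y + δ.2 ∧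
        y + δ.2 < ((g.headD []).length : Int) ∧ pvGet2 g (x + δ.1) (y + δ.2) = 1
    · rw [hstep, if_pos hcond]
      obtain ⟨hb1, hb2, hb3, hb4, hval⟩ := hcond
      have hglen : (g.length : Int) = (land.length : Int) := by rw [hG.1]
      have hhead : ((g.headD []).length : Int) = ((pvCn land : Nat) : Int) := by
        rw [pvGInv_headD hG hPre.1]
      have hin : pvInB land (x + δ.1, y + δ.2) :=
        ⟨hb1, by rw [← hglen]; exact hb2, hb3, by rw [← hhead]; exact hb4⟩
      obtain ⟨hoild, hnotV⟩ := (pvGInv_test hG hin).mp hval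
      have hadj : pvAdj land (x, y) (x + δ.1, y + δ.2) :=
        pvAdj_iff_pos.mpr ⟨hoilxy, hoild, δ, hδ, rfl⟩
      have hrd : pvReach land s (x + δ.1, y + δ.2) := hrxy.tail hadj
      have hG' : pvGInv land (pvSet2 g (x + δ.1) (y + δ.2) cnt)
          (V0 ++ (M ++ [(x + δ.1, y + δ.2)])) := by
        have := pvGInv_set (n := (x + δ.1, y + δ.2)) (v := cnt) hPre hG hin hnotV hcnt
        rwa [List.append_assoc] at this
      have hnd' : (M ++ [(x + δ.1, y + δ.2)]).Nodup := by
        rw [List.nodup_append]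
        refine ⟨hnd, List.nodup_singleton _, ?_⟩
        intro a ha b hb
        rw [List.mem_singleton] at hb
        intro he
        exact hnotV (List.mem_append.mpr (Or.inr ((he.trans hb) ▸ ha)))
      have hreach' : ∀ c ∈ M ++ [(x + δ.1, y + δ.2)], pvReach land s c := by
        intro c hc
        rcases List.mem_append.mp hc with h' | h'
        · exact hreach c h'
        · rw [List.mem_singleton] at h'
          exact h' ▸ hrd
      have hLD' : pvLDC (ld.insert (y + δ.2)
          (PySem.Set.add ((ld.get? (y + δ.2)).getD PySem.Set.empty) cnt))
          (done ++ [(cnt, M ++ [(x + δ.1, y + δ.2)])]) :=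
        pvLDC_step (n := (x + δ.1, y + δ.2)) hLD
      have hk1' : (ld.insert (y + δ.2)
          (PySem.Set.add ((ld.get? (y + δ.2)).getD PySem.Set.empty) cnt)).keys.Nodup := by
        rw [pv_keys_insert]
        exact pv_set_nodup_add hk1
      have hk2' : ∀ y' ∈ (ld.insert (y + δ.2)
          (PySem.Set.add ((ld.get? (y + δ.2)).getD PySem.Set.empty) cnt)).keys,
          0 ≤ y' ∧ y' < (pvCn land : Int) := by
        rw [pv_keys_insert]
        intro y' hy'
        rcases (PySem.Set.mem_add _ _ _).mp hy' with h' | rfl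
        · exact hk2 y' h'
        · exact ⟨hb3, by rw [← hhead]; exact hb4⟩
      obtain ⟨P, g', ld', heq, c1, c2, c3, c4, c5, c6, c7⟩ :=
        ih hds' (pvSet2 g (x + δ.1) (y + δ.2) cnt) _ (q ++ [(x + δ.1, y + δ.2)]) (oil + 1)
          (M ++ [(x + δ.1, y + δ.2)]) hG' hnd' hrxy hreach' hLD' hk1' hk2'
      refine ⟨(x + δ.1, y + δ.2) :: P, g', ld', ?_, ?_, ?_, ?_, ?_, c5, c6, ?_⟩
      · rw [heq]
        refine Prod.ext_iff.mpr ⟨rfl, Prod.ext_iff.mpr ⟨rfl, Prod.ext_iff.mpr ⟨?_, ?_⟩⟩⟩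
        · simp
        · simp only [List.length_cons]
          push_cast
          ring
      · rwa [List.append_assoc, List.singleton_append] at c1
      · rwa [List.append_assoc, List.singleton_append] at c2
      · intro c hc
        rcases List.mem_cons.mp hc with rfl | h'
        · exact hrd
        · exact c3 c h'
      · rwa [List.append_assoc, List.singleton_append] at c4
      · intro δ' hδ' hadj'
        rcases List.mem_cons.mp hδ' with rfl | h'
        · exact List.mem_append.mpr (Or.inr (List.mem_cons_self ..))
        · have h8 := c7 δ' h' hadj'
          rwa [List.append_assoc, List.singleton_append] at h8
    · rw [hstep, if_neg hcond]
      obtain ⟨P, g', ld', heq, c1, c2, c3, c4, c5, c6, c7⟩ :=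
        ih hds' g ld q oil M hG hnd hrxy hreach hLD hk1 hk2
      refine ⟨P, g', ld', heq, c1, c2, c3, c4, c5, c6, ?_⟩
      intro δ' hδ' hadj'
      rcases List.mem_cons.mp hδ' with rfl | h'
      · -- the guard failed, yet the neighbour is adjacent oil: it must already be marked
        have hadj2 := hadj'
        obtain ⟨-, hoild, -⟩ := hadj2
        have hin : pvInB land (x + δ'.1, y + δ'.2) := pvInB_of_oil hoild
        have hval : pvGet2 g (x + δ'.1) (y + δ'.2) ≠ 1 := by
          intro hval
          apply hcond
          obtain ⟨i1, i2, i3, i4⟩ := hin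
          refine ⟨i1, ?_, i3, ?_, hval⟩
          · rw [hG.1]; exact i2
          · rw [pvGInv_headD hG hPre.1]; exact i4
        have hmem : (x + δ'.1, y + δ'.2) ∈ V0 ++ M := by
          by_contra hnm
          exact hval ((pvGInv_test hG hin).mpr ⟨hoild, hnm⟩)
        rcases List.mem_append.mp hmem with h' | h'
        · exact absurd h' (pv_notV0_of_reach hV0 hsV0 (hrxy.tail hadj'))

        · exact List.mem_append.mpr (Or.inl h')
      · exact c7 δ' h' hadj'
-- ---------- A-side: BFS loop and entry ----------
theorem pv_bfs_loop (land : List (List Int)) (V0 : List (Int × Int))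
    (done : List (Int × List (Int × Int))) (cnt : Int) (s : Int × Int)
    (hPre : Pre_solution land) (hs : pvOil land s) (hsV0 : s ∉ V0)
    (hV0 : ∀ c ∈ V0, ∀ d, pvAdj land c d → d ∈ V0) (hcnt : cnt ≠ 1) :
    ∀ (f : Nat) (g : List (List Int)) (ld : PySem.Dict Int (PySem.Set Int))
      (q : List (Int × Int)) (oil : Int) (M : List (Int × Int)),
      pvGInv land g (V0 ++ M) → M.Nodup → s ∈ M → (∀ c ∈ M, pvReach land s c) →
      (∀ c ∈ q, c ∈ M) → (∀ c ∈ M, c ∉ q → ∀ d, pvAdj land c d → d ∈ M) →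
      oil = (M.length : Int) →
      pvLDC ld (done ++ [(cnt, M)]) → ld.keys.Nodup →
      (∀ y' ∈ ld.keys, 0 ≤ y' ∧ y' < (pvCn land : Int)) →
      (pvOilList land).length + q.length ≤ f + M.length →
      ∃ (Mf : List (Int × Int)) (gf : List (List Int)) (ldf : PySem.Dict Int (PySem.Set Int)),
        pvBfsLoop cnt f (g, ld, q, oil) = ((Mf.length : Int), gf, ldf) ∧
        Mf.Nodup ∧ (∀ d, d ∈ Mf ↔ pvReach land s d) ∧
        pvGInv land gf (V0 ++ Mf) ∧ pvLDC ldf (done ++ [(cnt, Mf)]) ∧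
        ldf.keys.Nodup ∧ (∀ y' ∈ ldf.keys, 0 ≤ y' ∧ y' < (pvCn land : Int)) := by
  intro f
  induction f with
  | zero =>
    intro g ld q oil M hG hnd hsM hreach hq hcl hoil hLD hk1 hk2 hfuel
    have hsub : M ⊆ pvOilList land := fun c hc =>
      mem_pvOilList.mpr (pvOil_of_reach hs (hreach c hc))
    have hMN : M.length ≤ (pvOilList land).length :=
      (List.subperm_of_subset hnd hsub).length_le
    have hqnil : q = [] := List.eq_nil_of_length_eq_zero (by omega)
    subst hqnil
    refine ⟨M, g, ld, by rw [hoil]; rfl, hnd, ?_, hG, hLD, hk1, hk2⟩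
    intro d
    refine ⟨fun hd => hreach d hd, fun hr => ?_⟩
    exact pvReach_closed (fun c hc d' had => hcl c hc (by simp) d' had) hsM hr
  | succ f ih =>
    intro g ld q oil M hG hnd hsM hreach hq hcl hoil hLD hk1 hk2 hfuel
    cases q with
    | nil =>
      refine ⟨M, g, ld, by rw [hoil]; rfl, hnd, ?_, hG, hLD, hk1, hk2⟩
      intro d
      refine ⟨fun hd => hreach d hd, fun hr => ?_⟩
      exact pvReach_closed (fun c hc d' had => hcl c hc (by simp) d' had) hsM hr
    | cons c0 q' =>
      obtain ⟨x, y⟩ := c0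
      have hxyM : (x, y) ∈ M := hq _ (List.mem_cons_self ..)
      have hrxy : pvReach land s (x, y) := hreach _ hxyM
      obtain ⟨P, g', ld', heq, c1, c2, c3, c4, c5, c6, c7⟩ :=
        pv_bfs_scan land V0 done cnt s hPre hs hsV0 hV0 hcnt x y pvPos (fun _ h => h)
          g ld q' oil M hG hnd hrxy hreach hLD hk1 hk2
      have hstep : pvBfsLoop cnt (f + 1) (g, ld, (x, y) :: q', oil) =
          pvBfsLoop cnt f (pvPos.foldl (pvStepA cnt x y) (g, ld, q', oil)) := rfl
      rw [hstep, heq]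
      apply ih g' ld' (q' ++ P) (oil + (P.length : Int)) (M ++ P) c1 c2
        (List.mem_append.mpr (Or.inl hsM))
      · intro c hc
        rcases List.mem_append.mp hc with h' | h'
        · exact hreach c h'
        · exact c3 c h'
      · intro c hc
        rcases List.mem_append.mp hc with h' | h'
        · exact List.mem_append.mpr (Or.inl (hq c (List.mem_cons_of_mem _ h')))
        · exact List.mem_append.mpr (Or.inr h')
      · intro c hc hcq d hadj
        rcases List.mem_append.mp hc with hcM | hcP
        · by_cases hcxy : c = (x, y)
          · subst hcxy
            have hadj2 := hadj
            rw [pvAdj_iff_pos] at hadj2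
            obtain ⟨-, -, δ, hδ, rfl⟩ := hadj2
            exact c7 δ hδ hadj
          · have hcq' : c ∉ (x, y) :: q' := by
              intro hx
              rcases List.mem_cons.mp hx with h' | h'
              · exact hcxy h'
              · exact hcq (List.mem_append.mpr (Or.inl h'))
            exact List.mem_append.mpr (Or.inl (hcl c hcM hcq' d hadj))
        · exact absurd (List.mem_append.mpr (Or.inr hcP)) hcq
      · rw [hoil, List.length_append]
        push_cast
        ring
      · exact c4
      · exact c5
      · exact c6
      · rw [List.length_append, List.length_append]
        simp only [List.length_cons] at hfuel
        omega

theorem pv_bfs_spec (land : List (List Int)) (V0 : List (Int × Int))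
    (done : List (Int × List (Int × Int))) (cnt : Int) (n m : Int)
    (hPre : Pre_solution land) (hs : pvOil land (n, m)) (hsV0 : (n, m) ∉ V0)
    (hV0 : ∀ c ∈ V0, ∀ d, pvAdj land c d → d ∈ V0) (hcnt : cnt ≠ 1)
    (g : List (List Int)) (ld : PySem.Dict Int (PySem.Set Int))
    (hG : pvGInv land g V0) (hLD : pvLDC ld done) (hk1 : ld.keys.Nodup)
    (hk2 : ∀ y' ∈ ld.keys, 0 ≤ y' ∧ y' < (pvCn land : Int)) :
    ∃ (Mf : List (Int × Int)) (gf : List (List Int)) (ldf : PySem.Dict Int (PySem.Set Int)),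
      pvBfs g ld cnt n m = ((Mf.length : Int), gf, ldf) ∧
      Mf.Nodup ∧ (∀ d, d ∈ Mf ↔ pvReach land (n, m) d) ∧
      pvGInv land gf (V0 ++ Mf) ∧ pvLDC ldf (done ++ [(cnt, Mf)]) ∧
      ldf.keys.Nodup ∧ (∀ y' ∈ ldf.keys, 0 ≤ y' ∧ y' < (pvCn land : Int)) := by
  have hin : pvInB land (n, m) := pvInB_of_oil hs
  have hG1 : pvGInv land (pvSet2 g n m cnt) (V0 ++ [(n, m)]) := by
    have := pvGInv_set (n := (n, m)) (v := cnt) hPre (by simpa using hG) hin hsV0 hcnt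
    simpa using this
  have hLD1 : pvLDC (ld.insert m (PySem.Set.add ((ld.get? m).getD PySem.Set.empty) cnt))
      (done ++ [(cnt, [(n, m)])]) := by
    have h0 := pvLDC_extend_empty cnt hLD
    have h1 := pvLDC_step (n := ((n, m) : Int × Int)) (M := []) h0
    simpa using h1
  have hk1' : (ld.insert m (PySem.Set.add ((ld.get? m).getD PySem.Set.empty) cnt)).keys.Nodup := by
    rw [pv_keys_insert]
    exact pv_set_nodup_add hk1
  have hk2' : ∀ y' ∈ (ld.insert m
      (PySem.Set.add ((ld.get? m).getD PySem.Set.empty) cnt)).keys,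
      0 ≤ y' ∧ y' < (pvCn land : Int) := by
    rw [pv_keys_insert]
    intro y' hy'
    rcases (PySem.Set.mem_add _ _ _).mp hy' with h' | rfl
    · exact hk2 y' h'
    · exact ⟨hs.2.2.1, hs.2.2.2.1⟩
  have hfuel : (pvOilList land).length + 1 ≤ (g.length * (g.headD []).length + 1) + 1 := by
    have h1 := length_pvOilList_le land
    have h2 : g.length = land.length := hG.1
    have h3 : (g.headD []).length = pvCn land := pvGInv_headD (by simpa using hG) hPre.1
    rw [h2, h3]
    omega
  obtain ⟨Mf, gf, ldf, heq, d1, d2, d3, d4, d5, d6⟩ :=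
    pv_bfs_loop land V0 done cnt (n, m) hPre hs hsV0 hV0 hcnt
      (g.length * (g.headD []).length + 1) (pvSet2 g n m cnt)
      (ld.insert m (PySem.Set.add ((ld.get? m).getD PySem.Set.empty) cnt))
      [(n, m)] 1 [(n, m)] hG1 (List.nodup_singleton _) (List.mem_singleton_self _)
      (by intro c hc; rw [List.mem_singleton] at hc; exact hc ▸ .refl)
      (fun c hc => hc)
      (by
        intro c hc hcq
        exact absurd hc (by simpa using hcq))
      (by simp)
      hLD1 hk1' hk2' (by simpa using hfuel)
  exact ⟨Mf, gf, ldf, heq, d1, d2, d3, d4, d5, d6⟩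
-- ---------- A-side: the column-major double loop ----------
def pvV (done : List (Int × List (Int × Int))) : List (Int × Int) :=
  (done.map Prod.snd).flatten

theorem mem_pvV {done : List (Int × List (Int × Int))} {c : Int × Int} :
    c ∈ pvV done ↔ ∃ p ∈ done, c ∈ p.2 := by
  simp only [pvV, List.mem_flatten, List.mem_map]
  constructor
  · rintro ⟨K, ⟨p, hp, rfl⟩, hc⟩
    exact ⟨p, hp, hc⟩
  · rintro ⟨p, hp, hc⟩
    exact ⟨p.2, ⟨p, hp, rfl⟩, hc⟩

theorem pvV_append {done : List (Int × List (Int × Int))} {l : Int} {K : List (Int × Int)} :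
    pvV (done ++ [(l, K)]) = pvV done ++ K := by
  simp [pvV]

def pvBcol (i j : Int) (d : Int × Int) : Prop := d.2 < i ∨ (d.2 = i ∧ d.1 < j)

def pvOInv (land : List (List Int)) (B : (Int × Int) → Prop)
    (done : List (Int × List (Int × Int)))
    (st : List (List Int) × PySem.Dict Int Int × PySem.Dict Int (PySem.Set Int) × Int) :
    Prop :=
  st.2.2.2 = 2 + (done.length : Int) ∧
  done.map Prod.fst = PySem.List.pyRange 2 (2 + (done.length : Int)) 1 ∧
  pvGInv land st.1 (pvV done) ∧
  (∀ p ∈ done, p.2.Nodup ∧ ∃ a, pvOil land a ∧ ∀ d, (d ∈ p.2 ↔ pvReach land a d)) ∧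
  done.Pairwise (fun p p' => ∀ x, x ∈ p.2 → x ∉ p'.2) ∧
  (∀ c, c ∈ pvV done ↔ (pvOil land c ∧ ∃ d, pvReach land c d ∧ B d)) ∧
  st.2.1 = PySem.Dict.mk (done.map (fun p => (p.1, (p.2.length : Int)))) ∧
  pvLDC st.2.2.1 done ∧ st.2.2.1.keys.Nodup ∧
  (∀ y' ∈ st.2.2.1.keys, 0 ≤ y' ∧ y' < (pvCn land : Int))

theorem pvOInv_congr {land : List (List Int)} {B B' : (Int × Int) → Prop}
    {done : List (Int × List (Int × Int))}
    {st : List (List Int) × PySem.Dict Int Int × PySem.Dict Int (PySem.Set Int) × Int}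
    (hBB : ∀ d, pvOil land d → (B d ↔ B' d)) (h : pvOInv land B done st) :
    pvOInv land B' done st := by
  obtain ⟨h1, h2, h3, h4, h5, h6, h7, h8, h9, h10⟩ := h
  refine ⟨h1, h2, h3, h4, h5, ?_, h7, h8, h9, h10⟩
  intro c
  rw [h6 c]
  constructor
  · rintro ⟨hoil, d, hr, hB⟩
    exact ⟨hoil, d, hr, (hBB d (pvOil_of_reach hoil hr)).mp hB⟩
  · rintro ⟨hoil, d, hr, hB⟩
    exact ⟨hoil, d, hr, (hBB d (pvOil_of_reach hoil hr)).mpr hB⟩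

theorem pv_dict_insert_fresh {ν : Type} (l : List (Int × ν)) (k : Int) (v : ν)
    (h : (PySem.Dict.mk l).contains k = false) :
    (PySem.Dict.mk l).insert k v = PySem.Dict.mk (l ++ [(k, v)]) := by
  apply PySem.Dict.ext
  have := PySem.Dict.items_foldl_insert_fresh (l := [()]) (k := fun _ => k) (v := fun _ => v)
    (PySem.Dict.mk l) (by intro a _; exact h) (by simp)
  simpa using this

theorem pvV0_closed {land : List (List Int)} {done : List (Int × List (Int × Int))}
    (h4 : ∀ p ∈ done, p.2.Nodup ∧ ∃ a, pvOil land a ∧ ∀ d, (d ∈ p.2 ↔ pvReach land a d)) :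
    ∀ c ∈ pvV done, ∀ d, pvAdj land c d → d ∈ pvV done := by
  intro c hc d hadj
  obtain ⟨p, hp, hcp⟩ := mem_pvV.mp hc
  obtain ⟨-, a, -, hchar⟩ := h4 p hp
  exact mem_pvV.mpr ⟨p, hp, (hchar d).mpr (((hchar c).mp hcp).tail hadj)⟩

theorem pvBcol_step {i j : Int} {d : Int × Int} (h1 : pvBcol i (j + 1) d)
    (h2 : ¬ pvBcol i j d) : d = (j, i) := by
  obtain ⟨a, b⟩ := d
  simp only [pvBcol, not_or, not_and] at h1 h2
  rw [Prod.ext_iff]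
  rcases h1 with h | ⟨hb, ha⟩
  · exact absurd h h2.1
  · have := h2.2 hb
    exact ⟨by omega, by omega⟩

theorem pv_outer_step {land : List (List Int)} (hPre : Pre_solution land) {i j : Int}
    (hi0 : 0 ≤ i) (hiC : i < (pvCn land : Int)) (hj0 : 0 ≤ j) (hjR : j < (land.length : Int))
    {done : List (Int × List (Int × Int))} {g : List (List Int)} {dic : PySem.Dict Int Int}
    {ld : PySem.Dict Int (PySem.Set Int)} {cnt : Int}
    (h : pvOInv land (pvBcol i j) done (g, dic, ld, cnt)) :
    ∃ done', pvOInv land (pvBcol i (j + 1)) done'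
      (if pvGet2 g j i = 1 then
        ((pvBfs g ld cnt j i).2.1, dic.insert cnt (pvBfs g ld cnt j i).1,
         (pvBfs g ld cnt j i).2.2, cnt + 1)
      else (g, dic, ld, cnt)) := by
  obtain ⟨h1, h2, h3, h4, h5, h6, h7, h8, h9, h10⟩ := h
  simp only at h1 h2 h3 h4 h5 h6 h7 h8 h9 h10
  have hin : pvInB land (j, i) := ⟨hj0, hjR, hi0, hiC⟩
  by_cases hval : pvGet2 g j i = 1
  · obtain ⟨hoilji, hnotV⟩ := (pvGInv_test h3 hin).mp hval
    have hcnt1 : cnt ≠ 1 := by omega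
    obtain ⟨Mf, gf, ldf, heq, d1, d2, d3, d4, d5, d6⟩ :=
      pv_bfs_spec land (pvV done) done cnt j i hPre hoilji hnotV (pvV0_closed h4) hcnt1
        g ld h3 h8 h9 h10
    refine ⟨done ++ [(cnt, Mf)], ?_⟩
    rw [if_pos hval, heq]
    refine ⟨?_, ?_, ?_, ?_, ?_, ?_, ?_, ?_, d5, d6⟩
    · simp only [List.length_append, List.length_singleton]
      push_cast
      omega
    · simp only [List.map_append, List.map_cons, List.map_nil, List.length_append,
        List.length_singleton]
      have hc2 : cnt = 2 + (done.length : Int) := h1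
      have harith : (2 : Int) + ((done.length + 1 : Nat) : Int) = (2 + (done.length : Int)) + 1 := by
        push_cast; ring
      rw [h2, hc2, harith, PySem.List.pyRange_one_succ_right (by omega)]
    · rw [pvV_append]
      exact d3
    · intro p hp
      rcases List.mem_append.mp hp with h' | h'
      · exact h4 p h'
      · rw [List.mem_singleton] at h'
        subst h'
        exact ⟨d1, (j, i), hoilji, d2⟩
    · rw [List.pairwise_append]
      refine ⟨h5, List.pairwise_singleton _ _, ?_⟩
      intro p hp p' hp'
      rw [List.mem_singleton] at hp'
      subst hp'
      intro x hxp hxM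
      obtain ⟨-, a, -, hchar⟩ := h4 p hp
      have hra : pvReach land a (j, i) :=
        ((hchar x).mp hxp).trans (pvReach_symm (d2 x |>.mp hxM))
      exact hnotV (mem_pvV.mpr ⟨p, hp, (hchar (j, i)).mpr hra⟩)
    · intro c
      rw [pvV_append, List.mem_append]
      constructor
      · rintro (hc | hc)
        · obtain ⟨hoil, d, hr, hB⟩ := (h6 c).mp hc
          refine ⟨hoil, d, hr, ?_⟩
          rcases hB with hB | hB
          · exact Or.inl hB
          · exact Or.inr ⟨hB.1, by omega⟩
        · have hrc : pvReach land (j, i) c := (d2 c).mp hc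
          exact ⟨pvOil_of_reach hoilji hrc, (j, i), pvReach_symm hrc,
            Or.inr ⟨rfl, by omega⟩⟩
      · rintro ⟨hoil, d, hr, hB⟩
        by_cases hBold : pvBcol i j d
        · exact Or.inl ((h6 c).mpr ⟨hoil, d, hr, hBold⟩)
        · have hd : d = (j, i) := pvBcol_step hB hBold
          subst hd
          exact Or.inr ((d2 c).mpr (pvReach_symm hr))
    · rw [h7]
      have hfresh : (PySem.Dict.mk (done.map (fun p => (p.1, (p.2.length : Int))))).contains cnt
          = false := by
        rw [PySem.Dict.contains_mk]
        rw [Bool.eq_false_iff]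
        intro hany
        obtain ⟨p, hp, hpe⟩ := List.any_eq_true.mp hany
        obtain ⟨q, hq, rfl⟩ := List.mem_map.mp hp
        have : q.1 = cnt := by simpa using hpe
        have hmem : cnt ∈ done.map Prod.fst := List.mem_map.mpr ⟨q, hq, this⟩
        rw [h2, PySem.List.mem_pyRange_one] at hmem
        omega
      rw [pv_dict_insert_fresh _ _ _ hfresh]
      simp
    · rw [show (done ++ [(cnt, Mf)]) = (done ++ [(cnt, Mf)]) from rfl]
      exact d4
  · refine ⟨done, ?_⟩
    rw [if_neg hval]
    refine ⟨h1, h2, h3, h4, h5, ?_, h7, h8, h9, h10⟩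
    intro c
    rw [h6 c]
    constructor
    · rintro ⟨hoil, d, hr, hB⟩
      refine ⟨hoil, d, hr, ?_⟩
      rcases hB with hB | hB
      · exact Or.inl hB
      · exact Or.inr ⟨hB.1, by omega⟩
    · rintro ⟨hoil, d, hr, hB⟩
      by_cases hBold : pvBcol i j d
      · exact ⟨hoil, d, hr, hBold⟩
      · have hd : d = (j, i) := pvBcol_step hB hBold
        subst hd
        -- the test failed: (j, i) is either already visited or not oil
        by_cases hV : (j, i) ∈ pvV done
        · obtain ⟨-, d', hr', hB'⟩ := (h6 _).mp hV
          exact ⟨hoil, d', hr.trans hr', hB'⟩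
        · rcases pvReach_oil_right hr with he | hoilji
          · exact absurd (((pvGInv_test h3 hin).mpr ⟨he ▸ hoil, hV⟩)) hval
          · exact absurd (((pvGInv_test h3 hin).mpr ⟨hoilji, hV⟩)) hval
-- ---------- A-side: folding the two loops ----------
theorem pvBcol_colend {land : List (List Int)} {i : Int} {d : Int × Int}
    (hoil : pvOil land d) : (pvBcol i (land.length : Int) d ↔ pvBcol (i + 1) 0 d) := by
  obtain ⟨h1, h2, h3, h4, h5⟩ := hoil
  simp only [pvBcol]
  omega

theorem pv_inner_fold {land : List (List Int)} (hPre : Pre_solution land) {i : Int}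
    (hi0 : 0 ≤ i) (hiC : i < (pvCn land : Int)) :
    ∀ (k : Nat) (j : Int), 0 ≤ j → j + (k : Int) = (land.length : Int) →
    ∀ (done : List (Int × List (Int × Int)))
      (st : List (List Int) × PySem.Dict Int Int × PySem.Dict Int (PySem.Set Int) × Int),
      pvOInv land (pvBcol i j) done st →
      ∃ done', pvOInv land (pvBcol i (land.length : Int)) done'
        ((PySem.List.pyRange j (land.length : Int) 1).foldl (fun st j =>
          let (g, dic, ld, cnt) := st
          if pvGet2 g j i = 1 then
            let r := pvBfs g ld cnt j i
            (r.2.1, dic.insert cnt r.1, r.2.2, cnt + 1)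
          else st) st) := by
  intro k
  induction k with
  | zero =>
    intro j hj0 hjend done st hI
    have hj : j = (land.length : Int) := by push_cast at hjend; omega
    subst hj
    rw [PySem.List.pyRange_one_eq_nil le_rfl, List.foldl_nil]
    exact ⟨done, hI⟩
  | succ k ih =>
    intro j hj0 hjend done st hI
    have hjR : j < (land.length : Int) := by push_cast at hjend; omega
    rw [PySem.List.pyRange_one_cons hjR, List.foldl_cons]
    obtain ⟨g, dic, ld, cnt⟩ := st
    obtain ⟨done', hI'⟩ := pv_outer_step hPre hi0 hiC hj0 hjR hI
    exact ih (j + 1) (by omega) (by push_cast at hjend ⊢; omega) done' _ hI'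

theorem pv_outer_fold {land : List (List Int)} (hPre : Pre_solution land) :
    ∀ (k : Nat) (i : Int), 0 ≤ i → i + (k : Int) = (pvCn land : Int) →
    ∀ (done : List (Int × List (Int × Int)))
      (st : List (List Int) × PySem.Dict Int Int × PySem.Dict Int (PySem.Set Int) × Int),
      pvOInv land (pvBcol i 0) done st →
      ∃ done', pvOInv land (pvBcol ((pvCn land : Nat) : Int) 0) done'
        ((PySem.List.pyRange i ((pvCn land : Nat) : Int) 1).foldl (fun st i =>
          (PySem.List.pyRange 0 (land.length : Int) 1).foldl (fun st j =>
            let (g, dic, ld, cnt) := st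
            if pvGet2 g j i = 1 then
              let r := pvBfs g ld cnt j i
              (r.2.1, dic.insert cnt r.1, r.2.2, cnt + 1)
            else st) st) st) := by
  intro k
  induction k with
  | zero =>
    intro i hi0 hiend done st hI
    have hi : i = ((pvCn land : Nat) : Int) := by push_cast at hiend; omega
    subst hi
    rw [PySem.List.pyRange_one_eq_nil le_rfl, List.foldl_nil]
    exact ⟨done, hI⟩
  | succ k ih =>
    intro i hi0 hiend done st hI
    have hiC : i < ((pvCn land : Nat) : Int) := by push_cast at hiend; omega
    rw [PySem.List.pyRange_one_cons hiC, List.foldl_cons]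
    obtain ⟨done', hI'⟩ :=
      pv_inner_fold hPre hi0 hiC land.length 0 le_rfl (by push_cast; omega) done st hI
    obtain ⟨done'', hI''⟩ := ih (i + 1) (by omega) (by push_cast at hiend ⊢; omega) done' _
      (pvOInv_congr (fun d hd => pvBcol_colend hd) hI')
    exact ⟨done'', hI''⟩

theorem pv_OInv_init (land : List (List Int)) :
    pvOInv land (pvBcol 0 0) []
      (land, (PySem.Dict.empty : PySem.Dict Int Int),
       (PySem.Dict.empty : PySem.Dict Int (PySem.Set Int)), (2 : Int)) := by
  refine ⟨by simp, ?_, ?_, by simp, by simp, ?_, rfl, ?_, ?_, ?_⟩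
  · rw [PySem.List.pyRange_one_eq_nil (by simp)]
    simp
  · exact pvGInv_init land
  · intro c
    simp only [pvV, List.map_nil, List.flatten_nil, List.not_mem_nil, false_iff, not_and]
    rintro hoil ⟨d, hr, hB⟩
    have hd := pvOil_of_reach hoil hr
    obtain ⟨g1, g2, g3, g4, g5⟩ := hd
    simp only [pvBcol] at hB
    omega
  · intro y
    refine ⟨fun _ p hp => absurd hp (List.not_mem_nil), fun v hv => ?_⟩
    rw [PySem.Dict.get?_empty] at hv
    exact absurd hv (by simp)
  · rw [show (PySem.Dict.empty : PySem.Dict Int (PySem.Set Int)).keys = [] from rfl]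
    exact List.nodup_nil
  · intro y' hy'
    rw [show (PySem.Dict.empty : PySem.Dict Int (PySem.Set Int)).keys = [] from rfl] at hy'
    exact absurd hy' (List.not_mem_nil)
-- ---------- A-side: reading the answer off the final state ----------
theorem pv_final_fold {land : List (List Int)} (hPre : Pre_solution land)
    {done : List (Int × List (Int × Int))}
    {st : List (List Int) × PySem.Dict Int Int × PySem.Dict Int (PySem.Set Int) × Int}
    (hI : pvOInv land (pvBcol ((pvCn land : Nat) : Int) 0) done st) :
    ∃ (L : List (List (Int × Int))) (keys : List Int),
      pvIsCompList land L ∧ (∀ y ∈ keys, 0 ≤ y ∧ y < (pvCn land : Int)) ∧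
      (∀ y, y ∉ keys → pvColSum L y = 0) ∧
      st.2.2.1.values.foldl (fun ans v => max ans
        (v.foldl (fun t l => t + st.2.1.getD l 0) 0)) 0
        = keys.foldl (fun a y => max a (pvColSum L y)) 0 := by
  obtain ⟨g, dic, ld, cnt⟩ := st
  obtain ⟨h1, h2, h3, h4, h5, h6, h7, h8, h9, h10⟩ := hI
  simp only at h1 h2 h3 h4 h5 h6 h7 h8 h9 h10 ⊢
  have hVoil : ∀ c, c ∈ pvV done ↔ pvOil land c := by
    intro c
    rw [h6 c]
    constructor
    · rintro ⟨ho, -⟩; exact ho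
    · intro ho
      exact ⟨ho, c, .refl, Or.inl ho.2.2.2.1⟩
  have hcomp : pvIsCompList land (done.map Prod.snd) := by
    refine ⟨?_, ?_, List.pairwise_map.mpr h5⟩
    · intro K hK
      obtain ⟨p, hp, rfl⟩ := List.mem_map.mp hK
      exact h4 p hp
    · intro c hc
      obtain ⟨p, hp, hcp⟩ := mem_pvV.mp ((hVoil c).mpr hc)
      exact ⟨p.2, List.mem_map.mpr ⟨p, hp, rfl⟩, hcp⟩
  have hlabnd : (done.map Prod.fst).Nodup := by
    rw [h2]
    exact PySem.List.nodup_pyRange_one _ _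
  have hkeysnd : (PySem.Dict.mk (done.map (fun p => (p.1, (p.2.length : Int))))).keys.Nodup := by
    rw [PySem.Dict.keys_mk, List.map_map]
    simpa [Function.comp] using hlabnd
  have hgetD : ∀ p ∈ done, dic.getD p.1 0 = (p.2.length : Int) := by
    intro p hp
    show (dic.get? p.1).getD 0 = _
    rw [h7, pv_dict_mem_items_get? _ _ _ hkeysnd (List.mem_map.mpr ⟨p, hp, rfl⟩)]
    rfl
  have hfilnd : ∀ y : Int,
      ((done.filter (fun p => p.2.any (fun c => c.2 == y))).map Prod.fst).Nodup :=
    fun y => hlabnd.sublist (List.Sublist.map Prod.fst List.filter_sublist)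
  have hinner : ∀ (y : Int) (v : PySem.Set Int), ld.get? y = some v →
      v.foldl (fun t l => t + dic.getD l 0) 0 = pvColSum (done.map Prod.snd) y := by
    intro y v hv
    obtain ⟨hvnd, hvchar⟩ := (h8 y).2 v hv
    have hperm : v.Perm ((done.filter (fun p => p.2.any (fun c => c.2 == y))).map Prod.fst) := by
      apply (List.perm_ext_iff_of_nodup hvnd (hfilnd y)).mpr
      intro l
      rw [hvchar l]
      simp only [List.mem_map, List.mem_filter, List.any_eq_true, beq_iff_eq]
      constructor
      · rintro ⟨p, hp, hl, c, hc, hcy⟩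
        exact ⟨p, ⟨hp, c, hc, hcy⟩, hl⟩
      · rintro ⟨p, ⟨hp, c, hc, hcy⟩, hl⟩
        exact ⟨p, hp, hl, c, hc, hcy⟩
    rw [PySem.List.foldl_add, zero_add, (hperm.map (fun l => dic.getD l 0)).sum_eq,
      List.map_map]
    have hcong : ∀ p ∈ done.filter (fun p => p.2.any (fun c => c.2 == y)),
        ((fun l => dic.getD l 0) ∘ Prod.fst) p = ((p.2.length : Int)) := by
      intro p hp
      exact hgetD p (List.mem_of_mem_filter hp)
    rw [List.map_congr_left hcong]
    unfold pvColSum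
    rw [List.filter_map, List.map_map]
    apply congrArg
    apply congrArg
    apply List.filter_congr
    intro p _
    rfl
  have hzero : ∀ y, y ∉ ld.keys → pvColSum (done.map Prod.snd) y = 0 := by
    intro y hy
    have hnone : ld.get? y = none := (pv_dict_get?_none_iff ld.items y).mpr hy
    have hnomeet := (h8 y).1 hnone
    unfold pvColSum
    rw [List.filter_map]
    have : done.filter ((fun K => K.any (fun c => c.2 == y)) ∘ Prod.snd) = [] := by
      rw [List.filter_eq_nil_iff]
      intro p hp hany
      obtain ⟨c, hc, hcy⟩ := List.any_eq_true.mp hany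
      exact hnomeet p hp c hc (by simpa using hcy)
    rw [this]
    rfl
  refine ⟨done.map Prod.snd, ld.keys, hcomp, h10, hzero, ?_⟩
  rw [show ld.values = ld.items.map (fun p => p.2) from rfl, List.foldl_map,
    show ld.keys = ld.items.map (fun p => p.1) from rfl, List.foldl_map]
  apply PySem.List.foldl_congr_mem
  intro acc p hp
  congr 1
  exact hinner p.1 p.2 (pv_dict_mem_items_get? ld.items p.1 p.2 h9 hp)

theorem pv_solution_eq (land : List (List Int)) (hPre : Pre_solution land) :
    ∃ (L : List (List (Int × Int))) (keys : List Int),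
      pvIsCompList land L ∧ (∀ y ∈ keys, 0 ≤ y ∧ y < (pvCn land : Int)) ∧
      (∀ y, y ∉ keys → pvColSum L y = 0) ∧
      solution land = keys.foldl (fun a y => max a (pvColSum L y)) 0 := by
  obtain ⟨done, hI⟩ := pv_outer_fold hPre (pvCn land) 0 le_rfl (by push_cast; ring) []
    (land, PySem.Dict.empty, PySem.Dict.empty, 2) (pv_OInv_init land)
  obtain ⟨L, keys, hL, hb, h0, heq⟩ := pv_final_fold hPre hI
  exact ⟨L, keys, hL, hb, h0, heq⟩
-- ===== VERDICT (by name: the statement is the Claim_ definition above) =====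
theorem solution_spec : Claim_equal_solution := by
  unfold Claim_equal_solution
  intro land _ hpre
  unfold Spec_solution
  obtain ⟨L1, keys, hL1, hkb, hk0, hsol⟩ := pv_solution_eq land hpre
  obtain ⟨L2, hL2, halt⟩ := pv_solution_alt_eq land hpre.1
  rw [hsol, halt]
  have hcs : ∀ y, pvColSum L1 y = pvColSum L2 y := fun y => pvColSum_bridge hL1 hL2 y
  apply le_antisymm
  · apply pv_foldl_max_le
    · exact (PySem.List.le_foldl_max_int _ _ _).1
    · intro y hy
      rw [hcs y]
      exact (PySem.List.le_foldl_max_int _ _ _).2 y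
        (PySem.List.mem_pyRange_one.mpr ⟨(hkb y hy).1, (hkb y hy).2⟩)
  · apply pv_foldl_max_le
    · exact (PySem.List.le_foldl_max_int _ _ _).1
    · intro y hy
      by_cases hyk : y ∈ keys
      · rw [← hcs y]
        exact (PySem.List.le_foldl_max_int _ _ _).2 y hyk
      · rw [← hcs y, hk0 y hyk]
        exact (PySem.List.le_foldl_max_int _ _ _).1
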